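-- pv_equiv track=rewrite | github.com/IgrMd/yandex-algos-training | Тренировки по алгоритмам 3.0/Дивизион B/Тема 6. Обход графов в ширину/38.py | fleas_distance
-- ===== SOURCE A (Python) =====
-- def get_field(n, m, s, t, q, fleas):
--     field = [[None] * m for _ in range(n)]
--     for x, y in fleas:
--         field[x][y] = -1
--     field[s][t] = 0
--     return field
--
-- def bfs_fleas(n, m, s, t, q, field):
--     distances = [[[s, t]]]
--     distance = 0
--     dx = [-1, -2, -2, -1, 1, 2, 2, 1]
--     dy = [-2, -1, 1, 2, 2, 1, -1, -2]
--     while distance < len(distances):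
--         for now_x, now_y in distances[distance]:
--             distance = field[now_x][now_y] + 1
--             for i in range(8):
--                 x = now_x + dx[i]
--                 y = now_y + dy[i]
--                 if x < 0 or x >= n:
--                     continue
--                 if y < 0 or y >= m:
--                     continue
--                 if field[x][y] is None or field[x][y] == -1:
--                     field[x][y] = distance
--                     if distance >= len(distances):
--                         distances.append([])
--                     distances[distance].append([x, y])
--                 else:
--                     continue
--
-- def fleas_distance(n, m, s, t, q, fleas):
--     field = get_field(n, m, s, t, q, fleas)
--     bfs_fleas(n, m, s, t, q, field)
--     answer = 0
--     for x, y in fleas: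
--         fleas_path = field[x][y]
--         if fleas_path == -1:
--             return -1
--         answer += fleas_path
--     return answer
-- ===== SOURCE B (Python) =====
-- def fleas_distance(n, m, s, t, q, fleas):
--     # B: frontier-free dynamic-programming wavefront: mark the start's knight
--     # neighbours with 1, then repeatedly sweep the whole board, marking every
--     # unvisited cell one knight move from a cell at the current distance, until
--     # a sweep changes nothing; then sum the distances at the flea cells.
--     moves = ((-1, -2), (-2, -1), (-2, 1), (-1, 2), (1, 2), (2, 1), (2, -1), (1, -2))
--     dist = [[-1] * m for _ in range(n)]
--     dist[s][t] = 0
--     for a, b in moves: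
--         if 0 <= s + a < n and 0 <= t + b < m and dist[s + a][t + b] == -1:
--             dist[s + a][t + b] = 1
--     d = 1
--     changed = True
--     while changed:
--         changed = False
--         for x in range(n):
--             for y in range(m):
--                 if dist[x][y] == -1 and any(
--                     0 <= x + a < n and 0 <= y + b < m and dist[x + a][y + b] == d
--                     for a, b in moves
--                 ):
--                     dist[x][y] = d + 1
--                     changed = True
--         d += 1
--     total = 0
--     for x, y in fleas:
--         if dist[x][y] == -1:
--             return -1
--         total += dist[x][y]
--     return total
-- ===== Notes on version B (the rewrite author's own statement) =====
-- stated objective: alternative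
-- what changed: Replaces A's frontier-list BFS (explicit per-distance lists of cells expanded by knight moves over a None/-1-marked board) with a frontier-free dynamic-programming wavefront: the start's knight neighbours are marked 1, then repeated whole-board sweeps mark every still-unvisited cell lying one knight move from a cell at the current distance, stopping when a sweep changes nothing; no queue or frontier list is kept at all.
import Mathlib
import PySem

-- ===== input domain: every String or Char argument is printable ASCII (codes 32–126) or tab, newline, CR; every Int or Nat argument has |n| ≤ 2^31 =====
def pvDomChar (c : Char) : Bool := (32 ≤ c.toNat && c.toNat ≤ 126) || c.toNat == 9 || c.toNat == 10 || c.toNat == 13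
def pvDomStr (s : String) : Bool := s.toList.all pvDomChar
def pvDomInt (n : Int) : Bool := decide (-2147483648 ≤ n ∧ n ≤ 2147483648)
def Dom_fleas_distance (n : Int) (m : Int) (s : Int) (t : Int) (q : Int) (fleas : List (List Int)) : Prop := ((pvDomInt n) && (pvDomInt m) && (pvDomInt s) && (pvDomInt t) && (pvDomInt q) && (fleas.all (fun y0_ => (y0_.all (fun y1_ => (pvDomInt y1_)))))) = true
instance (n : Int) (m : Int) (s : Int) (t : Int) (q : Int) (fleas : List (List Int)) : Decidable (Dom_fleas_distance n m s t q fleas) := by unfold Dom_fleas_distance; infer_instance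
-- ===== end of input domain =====

-- B replaces A's frontier-list BFS (per-distance lists of cells, None/-1 board marks) with a
-- frontier-free dynamic-programming wavefront: the start's knight neighbours are marked 1, then
-- repeated whole-board sweeps mark every unvisited cell one knight move from a cell at the
-- current distance until a sweep changes nothing; same return value.


-- ===== PORT A =====
-- shared 2D-board plumbing (Python's field[x][y] reads/writes, negative indices wrap as in Python):
-- pvGet2 is exact wherever Python's read does not raise (all reads under Pre_); pvSet2 leaves the
-- board unchanged where Python's write would raise (unreachable under Pre_).
def pvGet2 {α : Type} (dfl : α) (f : List (List α)) (x y : Int) : α :=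
  (PySem.List.pyGet? ((PySem.List.pyGet? f x).getD []) y).getD dfl

def pvSet2 {α : Type} (f : List (List α)) (x y : Int) (v : α) : List (List α) :=
  match PySem.List.pyGet? f x with
  | none => f
  | some row => PySem.List.pySetD f x (PySem.List.pySetD row y v)

-- number of unvisited-looking cells; used only as the termination guard of the while-loops
def pvUnvis (g : List (List Int)) : Nat := (g.map (fun row => row.count (-1))).sum

def pvMapF (f : List (List (Option Int))) : List (List Int) :=
  f.map (fun row => row.map (fun o => o.getD (-1)))

def pvUnvisA (f : List (List (Option Int))) : Nat := pvUnvis (pvMapF f)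

-- get_field
def pvGetField (n m s t : Int) (fleas : List (List Int)) : List (List (Option Int)) :=
  let field := List.replicate n.toNat (List.replicate m.toNat (none : Option Int))
  -- 'for x, y in fleas': unpacking ported as fl[0], fl[1]; exact when each fl has length 2 (Pre_)
  let field := fleas.foldl (fun f fl =>
    pvSet2 f (PySem.List.pyGetD fl 0 0) (PySem.List.pyGetD fl 1 0) (some (-1))) field
  pvSet2 field s t (some 0)

def pvDx : List Int := [-1, -2, -2, -1, 1, 2, 2, 1]
def pvDy : List Int := [-2, -1, 1, 2, 2, 1, -1, -2]

-- the body of A's 'for now_x, now_y in distances[distance]' loop (state: field, distances, distance)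
def pvCellStepA (n m : Int)
    (st : List (List (Option Int)) × List (List (Int × Int)) × Int) (cell : Int × Int) :
    List (List (Option Int)) × List (List (Int × Int)) × Int :=
  -- distance = field[now_x][now_y] + 1 (the cell is always visited when read; .getD 0 is exact there)
  let distance := (pvGet2 none st.1 cell.1 cell.2).getD 0 + 1
  (PySem.List.pyRange 0 8 1).foldl (fun st2 i =>
    let x := cell.1 + PySem.List.pyGetD pvDx i 0
    let y := cell.2 + PySem.List.pyGetD pvDy i 0
    if x < 0 ∨ n ≤ x then st2
    else if y < 0 ∨ m ≤ y then st2
    else if pvGet2 none st2.1 x y = none ∨ pvGet2 none st2.1 x y = some (-1) then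
      let field' := pvSet2 st2.1 x y (some distance)
      let ds := if (st2.2.1.length : Int) ≤ distance then st2.2.1 ++ [[]] else st2.2.1
      let ds := PySem.List.pySetD ds distance (PySem.List.pyGetD ds distance [] ++ [(x, y)])
      (field', ds, distance)
    else st2) (st.1, st.2.1, distance)

-- A's 'while distance < len(distances)' loop; the guard only makes the recursion total:
-- whenever Python re-enters the loop it has just discovered new cells, so the guard holds there
def pvBfsA (n m : Int) (field : List (List (Option Int)))
    (distances : List (List (Int × Int))) (distance : Int) : List (List (Option Int)) :=
  if distance < (distances.length : Int) then
    let st := ((PySem.List.pyGet? distances distance).getD []).foldl (pvCellStepA n m)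
      (field, distances, distance)
    if h : pvUnvisA st.1 < pvUnvisA field then pvBfsA n m st.1 st.2.1 st.2.2 else st.1
  else field
termination_by pvUnvisA field
decreasing_by exact h

-- A's final 'for x, y in fleas' loop with its early 'return -1'
def pvSumFleasA (field : List (List (Option Int))) : List (List Int) → Int → Int
  | [], answer => answer
  | fl :: rest, answer =>
    let v := pvGet2 none field (PySem.List.pyGetD fl 0 0) (PySem.List.pyGetD fl 1 0)
    if v = some (-1) then -1
    -- answer += fleas_path: the value is never None here under Pre_; .getD 0 is exact there
    else pvSumFleasA field rest (answer + v.getD 0)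

def fleas_distance (n : Int) (m : Int) (s : Int) (t : Int) (q : Int) (fleas : List (List Int)) : Int :=
  let field := pvGetField n m s t fleas
  let field := pvBfsA n m field [[(s, t)]] 0
  pvSumFleasA field fleas 0

-- ===== PORT B =====
def pvMoves : List (Int × Int) := [(-1, -2), (-2, -1), (-2, 1), (-1, 2), (1, 2), (2, 1), (2, -1), (1, -2)]

-- the 'for a, b in moves' seeding loop that marks the start's knight neighbours with 1
def pvSeed (n m s t : Int) (g : List (List Int)) : List (List Int) :=
  pvMoves.foldl (fun g mv =>
    if 0 ≤ s + mv.1 ∧ s + mv.1 < n ∧ 0 ≤ t + mv.2 ∧ t + mv.2 < m ∧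
        pvGet2 (-1) g (s + mv.1) (t + mv.2) = -1
    then pvSet2 g (s + mv.1) (t + mv.2) 1 else g) g

-- body of B's innermost 'for y in range(m)' loop ('any(...)' ported as a bounded ∃ over the moves)
def pvSweepBody (n m d x : Int) (st : List (List Int) × Bool) (y : Int) : List (List Int) × Bool :=
  if pvGet2 (-1) st.1 x y = -1 ∧ ∃ mv ∈ pvMoves,
      0 ≤ x + mv.1 ∧ x + mv.1 < n ∧ 0 ≤ y + mv.2 ∧ y + mv.2 < m ∧
      pvGet2 (-1) st.1 (x + mv.1) (y + mv.2) = d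
  then (pvSet2 st.1 x y (d + 1), true) else st

-- one whole-board pass: 'changed = False; for x in range(n): for y in range(m): …'
def pvSweep (n m d : Int) (g : List (List Int)) : List (List Int) × Bool :=
  (PySem.List.pyRange 0 n 1).foldl (fun st x =>
    (PySem.List.pyRange 0 m 1).foldl (pvSweepBody n m d x) st) (g, false)

-- B's 'while changed' loop; the guard only makes the recursion total: whenever Python
-- re-enters the loop the sweep has just marked at least one cell, so the guard holds there
def pvLoopB (n m : Int) (dist : List (List Int)) (d : Int) : List (List Int) :=
  let st := pvSweep n m d dist
  if st.2 = true then
    if h : pvUnvis st.1 < pvUnvis dist then pvLoopB n m st.1 (d + 1) else st.1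
  else st.1
termination_by pvUnvis dist
decreasing_by exact h

-- B's final 'for x, y in fleas' loop with its early 'return -1'
def pvSumFleasB (dist : List (List Int)) : List (List Int) → Int → Int
  | [], total => total
  | fl :: rest, total =>
    let v := pvGet2 (-1) dist (PySem.List.pyGetD fl 0 0) (PySem.List.pyGetD fl 1 0)
    if v = -1 then -1 else pvSumFleasB dist rest (total + v)

def fleas_distance_alt (n : Int) (m : Int) (s : Int) (t : Int) (q : Int) (fleas : List (List Int)) : Int :=
  let dist := List.replicate n.toNat (List.replicate m.toNat (-1 : Int))
  let dist := pvSet2 dist s t 0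
  let dist := pvSeed n m s t dist
  let dist := pvLoopB n m dist 1
  pvSumFleasB dist fleas 0

-- ===== PRECONDITION & SPEC =====
-- Pre_ is exactly where Python A returns: the start cell and every flea cell must be a valid
-- (possibly negative, Python-wrapping) board index, and every flea must be a 2-element pair;
-- outside this A raises IndexError or ValueError.
def Pre_fleas_distance (n : Int) (m : Int) (s : Int) (t : Int) (q : Int) (fleas : List (List Int)) : Prop :=
  PySem.Raise.InRange n.toNat s ∧ PySem.Raise.InRange m.toNat t ∧
  ∀ fl ∈ fleas, fl.length = 2 ∧
    PySem.Raise.InRange n.toNat (PySem.List.pyGetD fl 0 0) ∧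
    PySem.Raise.InRange m.toNat (PySem.List.pyGetD fl 1 0)
instance (n : Int) (m : Int) (s : Int) (t : Int) (q : Int) (fleas : List (List Int)) : Decidable (Pre_fleas_distance n m s t q fleas) := by unfold Pre_fleas_distance; infer_instance

def pvWitness_fleas_distance : Int × Int × Int × Int × Int × List (List Int) := (4, 4, 0, 0, 2, [[3, 3], [-1, 2]])

def Spec_fleas_distance (n : Int) (m : Int) (s : Int) (t : Int) (q : Int) (fleas : List (List Int)) (out : Int) : Prop := out = fleas_distance_alt n m s t q fleas
instance (n : Int) (m : Int) (s : Int) (t : Int) (q : Int) (fleas : List (List Int)) (out : Int) : Decidable (Spec_fleas_distance n m s t q fleas out) := by unfold Spec_fleas_distance; infer_instance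

-- ===== CLAIM (what is proved, stated in full; the proofs are below) =====
def Claim_equal_fleas_distance : Prop := ∀ (n : Int) (m : Int) (s : Int) (t : Int) (q : Int) (fleas : List (List Int)), Dom_fleas_distance n m s t q fleas → Pre_fleas_distance n m s t q fleas → Spec_fleas_distance n m s t q fleas (fleas_distance n m s t q fleas)

-- ===== LEMMAS AND PROOFS =====

-- ---------- index / 2D-array plumbing ----------

theorem pvIdx_lt {len : Nat} {i : Int} {k : Nat} (h : PySem.List.pyIdx? len i = some k) : k < len := by
  unfold PySem.List.pyIdx? at h; split_ifs at h <;> simp_all <;> omega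

theorem pvIdx_of_inRange {len : Nat} {i : Int} (h : PySem.Raise.InRange len i) :
    ∃ k, PySem.List.pyIdx? len i = some k := by
  obtain ⟨h1, h2⟩ := h
  unfold PySem.List.pyIdx?
  split_ifs <;> simp_all

def pvWF {α : Type} (n m : Int) (f : List (List α)) : Prop :=
  f.length = n.toNat ∧ ∀ row ∈ f, row.length = m.toNat

theorem pvSet2_eq_cases {α : Type} (f : List (List α)) (x y : Int) (v : α) :
    pvSet2 f x y v = f ∨
    ∃ row k, PySem.List.pyGet? f x = some row ∧ PySem.List.pyIdx? f.length x = some k ∧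
      pvSet2 f x y v = f.set k (PySem.List.pySetD row y v) := by
  unfold pvSet2
  cases hg : PySem.List.pyGet? f x with
  | none => exact Or.inl rfl
  | some row =>
    have hk : ∃ k, PySem.List.pyIdx? f.length x = some k := by
      unfold PySem.List.pyGet? at hg
      cases h : PySem.List.pyIdx? f.length x with
      | none => rw [h] at hg; simp at hg
      | some k => exact ⟨k, rfl⟩
    obtain ⟨k, hk⟩ := hk
    refine Or.inr ⟨row, k, rfl, hk, ?_⟩
    unfold PySem.List.pySetD PySem.List.pySet?
    rw [hk]
    rfl

theorem pvWF_set2 {α : Type} {n m : Int} {f : List (List α)} (hf : pvWF n m f)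
    (x y : Int) (v : α) : pvWF n m (pvSet2 f x y v) := by
  obtain ⟨h1, h2⟩ := hf
  rcases pvSet2_eq_cases f x y v with h | ⟨row, k, hg, hk, h⟩
  · rw [h]; exact ⟨h1, h2⟩
  · rw [h]
    refine ⟨by simpa using h1, ?_⟩
    intro r hr
    rcases List.mem_or_eq_of_mem_set hr with hr' | hr'
    · exact h2 r hr'
    · subst hr'
      rw [PySem.List.length_pySetD]
      exact h2 row (PySem.List.mem_of_pyGet?_eq_some _ hg)

def pvCellIdx? {α : Type} (f : List (List α)) (x y : Int) : Option (Nat × Nat) :=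
  (PySem.List.pyIdx? f.length x).bind fun k =>
    f[k]?.bind fun row => (PySem.List.pyIdx? row.length y).map fun j => (k, j)

theorem pvCellIdx?_some {α : Type} {f : List (List α)} {x y : Int} {k j : Nat}
    (h : pvCellIdx? f x y = some (k, j)) :
    PySem.List.pyIdx? f.length x = some k ∧
    ∃ row, f[k]? = some row ∧ PySem.List.pyIdx? row.length y = some j := by
  unfold pvCellIdx? at h
  cases hk : PySem.List.pyIdx? f.length x with
  | none => simp [hk] at h
  | some k' =>
    simp only [hk, Option.bind_some] at h
    cases hr : f[k']? with
    | none => simp [hr] at h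
    | some row =>
      simp only [hr, Option.bind_some] at h
      cases hj : PySem.List.pyIdx? row.length y with
      | none => simp [hj] at h
      | some j' =>
        simp only [hj, Option.map_some, Option.some_inj, Prod.mk.injEq] at h
        obtain ⟨e1, e2⟩ := h
        subst e1; subst e2
        exact ⟨rfl, row, hr, hj⟩

theorem pvGet2_none_idx {α : Type} {dfl : α} {f : List (List α)} {x y : Int}
    (h : pvCellIdx? f x y = none) : pvGet2 dfl f x y = dfl := by
  unfold pvCellIdx? at h
  unfold pvGet2 PySem.List.pyGet?
  cases hk : PySem.List.pyIdx? f.length x with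
  | none => simp
  | some k =>
    simp only [hk, Option.bind_some] at h ⊢
    cases hr : f[k]? with
    | none => simp
    | some row =>
      simp only [hr, Option.bind_some] at h ⊢
      cases hj : PySem.List.pyIdx? row.length y with
      | none => simp [hj]
      | some j => simp [hj] at h

theorem pvGet2_some_idx {α : Type} {dfl : α} {f : List (List α)} {x y : Int} {k j : Nat} {row : List α}
    (h : pvCellIdx? f x y = some (k, j)) (hr : f[k]? = some row) :
    ∃ hj : j < row.length, pvGet2 dfl f x y = row[j] := by
  obtain ⟨hk, row', hr', hj⟩ := pvCellIdx?_some h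
  rw [hr] at hr'
  cases hr'
  have hjl : j < row.length := pvIdx_lt hj
  refine ⟨hjl, ?_⟩
  unfold pvGet2 PySem.List.pyGet?
  simp [hk, hr, hj, List.getElem?_eq_getElem hjl]

theorem pvSet2_none_idx {α : Type} {f : List (List α)} {x y : Int} (v : α)
    (h : pvCellIdx? f x y = none) : pvSet2 f x y v = f := by
  unfold pvCellIdx? at h
  unfold pvSet2 PySem.List.pyGet?
  cases hk : PySem.List.pyIdx? f.length x with
  | none => simp
  | some k =>
    simp only [hk, Option.bind_some] at h ⊢
    cases hr : f[k]? with
    | none => simp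
    | some row =>
      simp only [hr, Option.bind_some] at h ⊢
      cases hj : PySem.List.pyIdx? row.length y with
      | none =>
        show PySem.List.pySetD f x (PySem.List.pySetD row y v) = f
        unfold PySem.List.pySetD PySem.List.pySet?
        rw [hj, hk]
        simp only [Option.map_none, Option.getD_none, Option.map_some, Option.getD_some]
        obtain ⟨hkl, hrow⟩ := List.getElem?_eq_some_iff.mp hr
        rw [← hrow]
        exact List.set_getElem_self hkl
      | some j => simp [hj] at h

theorem pvSet2_some_idx {α : Type} {f : List (List α)} {x y : Int} {k j : Nat} {row : List α} (v : α)
    (h : pvCellIdx? f x y = some (k, j)) (hr : f[k]? = some row) :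
    pvSet2 f x y v = f.set k (row.set j v) := by
  obtain ⟨hk, row', hr', hj⟩ := pvCellIdx?_some h
  rw [hr] at hr'
  cases hr'
  unfold pvSet2 PySem.List.pyGet?
  simp only [hk, Option.bind_some, hr]
  show PySem.List.pySetD f x (PySem.List.pySetD row y v) = f.set k (row.set j v)
  unfold PySem.List.pySetD PySem.List.pySet?
  rw [hj, hk]
  simp

theorem pvCellIdx?_set2 {α : Type} (f : List (List α)) (x y x' y' : Int) (v : α) :
    pvCellIdx? (pvSet2 f x y v) x' y' = pvCellIdx? f x' y' := by
  rcases Option.eq_none_or_eq_some (pvCellIdx? f x y) with h | ⟨⟨k, j⟩, h⟩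
  · rw [pvSet2_none_idx v h]
  · obtain ⟨hk, row, hr, hj⟩ := pvCellIdx?_some h
    rw [pvSet2_some_idx v h hr]
    unfold pvCellIdx?
    simp only [List.length_set]
    congr 1
    funext k'
    by_cases hkk : k' = k
    · subst hkk
      rw [List.getElem?_set_self (by exact (List.getElem?_eq_some_iff.mp hr).1), hr]
      simp [List.length_set]
    · rw [List.getElem?_set_ne (by omega)]

theorem pvGet2_set2_cases {α : Type} (dfl : α) (f : List (List α)) (x y x' y' : Int) (v : α) :
    pvGet2 dfl (pvSet2 f x y v) x' y' = pvGet2 dfl f x' y' ∨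
    (pvGet2 dfl (pvSet2 f x y v) x' y' = v ∧ pvGet2 dfl f x' y' = pvGet2 dfl f x y) := by
  rcases Option.eq_none_or_eq_some (pvCellIdx? f x y) with h | ⟨⟨k, j⟩, h⟩
  · rw [pvSet2_none_idx v h]; exact Or.inl rfl
  · obtain ⟨hk, row, hr, hj⟩ := pvCellIdx?_some h
    have hset := pvSet2_some_idx v h hr
    have hidx := pvCellIdx?_set2 f x y x' y' v
    rcases Option.eq_none_or_eq_some (pvCellIdx? f x' y') with h' | ⟨⟨k', j'⟩, h'⟩
    · rw [pvGet2_none_idx (dfl := dfl) h', pvGet2_none_idx (dfl := dfl) (hidx.trans h')]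
      exact Or.inl rfl
    · have h'' : pvCellIdx? (pvSet2 f x y v) x' y' = some (k', j') := hidx.trans h'
      obtain ⟨hk', row', hr', hj'⟩ := pvCellIdx?_some h'
      have hkl : k < f.length := (List.getElem?_eq_some_iff.mp hr).1
      by_cases hkk : k' = k
      · subst hkk
        rw [hr] at hr'
        cases hr'
        have hrset : (pvSet2 f x y v)[k']? = some (row.set j v) := by
          rw [hset, List.getElem?_set_self hkl]
        obtain ⟨hjl', e1⟩ := pvGet2_some_idx (dfl := dfl) h'' hrset
        obtain ⟨hjl2, e2⟩ := pvGet2_some_idx (dfl := dfl) h' hr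
        by_cases hjj : j' = j
        · subst hjj
          obtain ⟨hjl3, e3⟩ := pvGet2_some_idx (dfl := dfl) h hr
          refine Or.inr ⟨?_, ?_⟩
          · rw [e1, List.getElem_set_self]
          · rw [e2, e3]
        · left
          rw [e1, e2, List.getElem_set_ne (by omega)]
      · left
        have hrne : (pvSet2 f x y v)[k']? = f[k']? := by
          rw [hset, List.getElem?_set_ne (by omega)]
        obtain ⟨hjl', e1⟩ := pvGet2_some_idx (dfl := dfl) h'' (hrne.trans hr')
        obtain ⟨hjl2, e2⟩ := pvGet2_some_idx (dfl := dfl) h' hr'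
        rw [e1, e2]

theorem pvCellIdx?_of_inRange {α : Type} {n m : Int} {f : List (List α)} {x y : Int}
    (hf : pvWF n m f) (hx : PySem.Raise.InRange n.toNat x) (hy : PySem.Raise.InRange m.toNat y) :
    ∃ k j row, pvCellIdx? f x y = some (k, j) ∧ f[k]? = some row ∧ j < row.length := by
  obtain ⟨h1, h2⟩ := hf
  obtain ⟨k, hk⟩ := pvIdx_of_inRange (len := f.length) (by rw [h1]; exact hx)
  have hkl : k < f.length := pvIdx_lt hk
  have hrow : f[k]? = some f[k] := List.getElem?_eq_getElem hkl
  have hrl : f[k].length = m.toNat := h2 _ (List.getElem_mem hkl)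
  obtain ⟨j, hj⟩ := pvIdx_of_inRange (len := f[k].length) (by rw [hrl]; exact hy)
  refine ⟨k, j, f[k], ?_, hrow, pvIdx_lt hj⟩
  unfold pvCellIdx?
  simp [hk, hrow, hj]

theorem pvGet2_set2_self {α : Type} {n m : Int} {f : List (List α)} {x y : Int} (dfl : α) (v : α)
    (hf : pvWF n m f) (hx : PySem.Raise.InRange n.toNat x) (hy : PySem.Raise.InRange m.toNat y) :
    pvGet2 dfl (pvSet2 f x y v) x y = v := by
  obtain ⟨k, j, row, h, hr, hjl⟩ := pvCellIdx?_of_inRange hf hx hy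
  have hset := pvSet2_some_idx v h hr
  have hkl : k < f.length := (List.getElem?_eq_some_iff.mp hr).1
  have h'' : pvCellIdx? (pvSet2 f x y v) x y = some (k, j) := (pvCellIdx?_set2 f x y x y v).trans h
  have hrset : (pvSet2 f x y v)[k]? = some (row.set j v) := by
    rw [hset, List.getElem?_set_self hkl]
  obtain ⟨hjl', e1⟩ := pvGet2_some_idx (dfl := dfl) h'' hrset
  rw [e1, List.getElem_set_self]

theorem pvSum_map_set {α : Type} (g : α → Nat) (l : List α) (k : Nat) (v : α) (hk : k < l.length) :
    ((l.set k v).map g).sum + g l[k] = (l.map g).sum + g v := by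
  conv_rhs => rw [show l = l.take k ++ l[k] :: l.drop (k+1) from by
    rw [← List.drop_eq_getElem_cons hk, List.take_append_drop]]
  rw [List.set_eq_take_cons_drop v hk]
  simp only [List.map_append, List.map_cons, List.sum_append, List.sum_cons]
  omega

theorem pvCount_set_unvis (row : List Int) (j : Nat) (v : Int) (hj : j < row.length)
    (hrj : row[j] = -1) (hv : v ≠ -1) :
    (row.set j v).count (-1) + 1 = row.count (-1) := by
  conv_rhs => rw [show row = row.take j ++ row[j] :: row.drop (j+1) from by
    rw [← List.drop_eq_getElem_cons hj, List.take_append_drop]]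
  rw [List.set_eq_take_cons_drop v hj]
  simp [List.count_append, hrj, hv]
  omega

theorem pvUnvis_set2 {g : List (List Int)} {x y : Int} {k j : Nat} {row : List Int} {v : Int}
    (h : pvCellIdx? g x y = some (k, j)) (hr : g[k]? = some row)
    (hv : pvGet2 (-1) g x y = -1) (hne : v ≠ -1) :
    pvUnvis (pvSet2 g x y v) + 1 = pvUnvis g := by
  have hset := pvSet2_some_idx v h hr
  have hkl : k < g.length := (List.getElem?_eq_some_iff.mp hr).1
  obtain ⟨hjl, e⟩ := pvGet2_some_idx (dfl := (-1 : Int)) h hr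
  have hrj : row[j] = -1 := by rw [← e, hv]
  unfold pvUnvis
  rw [hset]
  have hgk : g[k] = row := (List.getElem?_eq_some_iff.mp hr).2
  have hsum := pvSum_map_set (fun r => r.count (-1)) g k (row.set j v) hkl
  simp only [hgk] at hsum
  have hcnt := pvCount_set_unvis row j v hjl hrj hne
  omega

theorem pvCellIdx?_map {α β : Type} (g : α → β) (f : List (List α)) (x y : Int) :
    pvCellIdx? (f.map (List.map g)) x y = pvCellIdx? f x y := by
  unfold pvCellIdx?
  simp only [List.length_map]
  congr 1
  funext k
  simp only [List.getElem?_map]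
  cases hr : f[k]? with
  | none => simp
  | some row => simp [List.length_map]

theorem pvMapF_WF {n m : Int} {f : List (List (Option Int))} (hf : pvWF n m f) :
    pvWF n m (pvMapF f) := by
  obtain ⟨h1, h2⟩ := hf
  refine ⟨by simpa [pvMapF] using h1, ?_⟩
  intro r hr
  simp only [pvMapF, List.mem_map] at hr
  obtain ⟨row, hrow, hr'⟩ := hr
  rw [← hr']
  simpa using h2 row hrow

theorem pvMapF_get2 (f : List (List (Option Int))) (x y : Int) :
    pvGet2 (-1) (pvMapF f) x y = (pvGet2 none f x y).getD (-1) := by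
  have hidx : pvCellIdx? (pvMapF f) x y = pvCellIdx? f x y := pvCellIdx?_map _ f x y
  rcases Option.eq_none_or_eq_some (pvCellIdx? f x y) with h | ⟨⟨k, j⟩, h⟩
  · rw [pvGet2_none_idx (dfl := (-1:Int)) (hidx.trans h), pvGet2_none_idx (dfl := (none : Option Int)) h]
    rfl
  · obtain ⟨hk, row, hr, hj⟩ := pvCellIdx?_some h
    have hrm : (pvMapF f)[k]? = some (row.map (fun o => o.getD (-1))) := by
      simp [pvMapF, List.getElem?_map, hr]
    obtain ⟨hjl1, e1⟩ := pvGet2_some_idx (dfl := (-1:Int)) (hidx.trans h) hrm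
    obtain ⟨hjl2, e2⟩ := pvGet2_some_idx (dfl := (none : Option Int)) h hr
    rw [e1, e2]
    simp

theorem pvMapF_set2 (f : List (List (Option Int))) (x y : Int) (v : Int) :
    pvMapF (pvSet2 f x y (some v)) = pvSet2 (pvMapF f) x y v := by
  have hidx : pvCellIdx? (pvMapF f) x y = pvCellIdx? f x y := pvCellIdx?_map _ f x y
  rcases Option.eq_none_or_eq_some (pvCellIdx? f x y) with h | ⟨⟨k, j⟩, h⟩
  · rw [pvSet2_none_idx _ h, pvSet2_none_idx _ (hidx.trans h)]
  · obtain ⟨hk, row, hr, hj⟩ := pvCellIdx?_some h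
    have hrm : (pvMapF f)[k]? = some (row.map (fun o => o.getD (-1))) := by
      simp [pvMapF, List.getElem?_map, hr]
    rw [pvSet2_some_idx _ h hr, pvSet2_some_idx _ (hidx.trans h) hrm]
    simp [pvMapF, List.map_set]

-- ---------- canonical (nonnegative in-range) coordinates ----------

theorem pvInRange_of_bounds {n x : Int} (h0 : 0 ≤ x) (h1 : x < n) :
    PySem.Raise.InRange n.toNat x := by
  constructor <;> omega

theorem pvIdx_nonneg {len : Nat} {i : Int} (h0 : 0 ≤ i) (h1 : i < (len : Int)) :
    PySem.List.pyIdx? len i = some i.toNat := by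
  unfold PySem.List.pyIdx?
  split_ifs <;> simp_all <;> omega

theorem pvCanonIdx {α : Type} {n m : Int} {g : List (List α)} (hWF : pvWF n m g)
    {x y : Int} (hx0 : 0 ≤ x) (hxn : x < n) (hy0 : 0 ≤ y) (hym : y < m) :
    ∃ (hk : x.toNat < g.length),
      pvCellIdx? g x y = some (x.toNat, y.toNat) ∧ g[x.toNat]? = some g[x.toNat] ∧
      y.toNat < g[x.toNat].length := by
  obtain ⟨h1, h2⟩ := hWF
  have hk : x.toNat < g.length := by omega
  have hrl : g[x.toNat].length = m.toNat := h2 _ (List.getElem_mem hk)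
  have hj : y.toNat < g[x.toNat].length := by omega
  refine ⟨hk, ?_, List.getElem?_eq_getElem hk, hj⟩
  unfold pvCellIdx?
  rw [pvIdx_nonneg hx0 (by omega), Option.bind_some, List.getElem?_eq_getElem hk,
    Option.bind_some, pvIdx_nonneg hy0 (by rw [hrl]; omega)]
  rfl

theorem pvGet2_canon {α : Type} (dfl : α) {n m : Int} {g : List (List α)} (hWF : pvWF n m g)
    {x y : Int} (hx0 : 0 ≤ x) (hxn : x < n) (hy0 : 0 ≤ y) (hym : y < m) :
    ∃ (hk : x.toNat < g.length) (hj : y.toNat < g[x.toNat].length),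
      pvGet2 dfl g x y = g[x.toNat][y.toNat] := by
  obtain ⟨hk, hci, hrow, hj⟩ := pvCanonIdx hWF hx0 hxn hy0 hym
  obtain ⟨hj', e⟩ := pvGet2_some_idx (dfl := dfl) hci hrow
  exact ⟨hk, hj, e⟩

theorem pvGet2_set2_ne {α : Type} (dfl : α) {n m : Int} {g : List (List α)} (hWF : pvWF n m g)
    {x y x' y' : Int} (hx0 : 0 ≤ x) (hxn : x < n) (hy0 : 0 ≤ y) (hym : y < m)
    (hx0' : 0 ≤ x') (hxn' : x' < n) (hy0' : 0 ≤ y') (hym' : y' < m)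
    (hne : ¬(x' = x ∧ y' = y)) (v : α) :
    pvGet2 dfl (pvSet2 g x y v) x' y' = pvGet2 dfl g x' y' := by
  obtain ⟨hk, hci, hrow, hj⟩ := pvCanonIdx hWF hx0 hxn hy0 hym
  obtain ⟨hk', hci', hrow', hj'⟩ := pvCanonIdx hWF hx0' hxn' hy0' hym'
  have hset := pvSet2_some_idx v hci hrow
  have hciS : pvCellIdx? (pvSet2 g x y v) x' y' = some (x'.toNat, y'.toNat) :=
    (pvCellIdx?_set2 g x y x' y' v).trans hci'
  obtain ⟨hjb, eb⟩ := pvGet2_some_idx (dfl := dfl) hci' hrow'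
  by_cases hxx : x'.toNat = x.toNat
  · have hyy : y'.toNat ≠ y.toNat := by
      intro hcon
      exact hne ⟨by omega, by omega⟩
    have hrowS : (pvSet2 g x y v)[x'.toNat]? = some (g[x.toNat].set y.toNat v) := by
      rw [hset, hxx, List.getElem?_set_self hk]
    obtain ⟨hja, ea⟩ := pvGet2_some_idx (dfl := dfl) hciS hrowS
    rw [ea, eb, List.getElem_set_ne (by omega)]
    have hre : some g[x.toNat] = some g[x'.toNat] := by
      rw [← hrow, ← hrow', hxx]
    have hre' : g[x.toNat] = g[x'.toNat] := by
      simpa using hre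
    simp only [hre']
  · have hrowS : (pvSet2 g x y v)[x'.toNat]? = some g[x'.toNat] := by
      rw [hset, List.getElem?_set_ne (by omega)]
      exact hrow'
    obtain ⟨hja, ea⟩ := pvGet2_some_idx (dfl := dfl) hciS hrowS
    rw [ea, eb]

theorem pvGridExt {g1 g2 : List (List Int)} {n m : Int}
    (h1 : pvWF n m g1) (h2 : pvWF n m g2)
    (h : ∀ x y : Int, 0 ≤ x → x < n → 0 ≤ y → y < m →
      pvGet2 (-1) g1 x y = pvGet2 (-1) g2 x y) : g1 = g2 := by
  obtain ⟨l1, r1⟩ := h1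
  obtain ⟨l2, r2⟩ := h2
  apply List.ext_getElem (by omega)
  intro k hk1 hk2
  have hrl1 : g1[k].length = m.toNat := r1 _ (List.getElem_mem hk1)
  have hrl2 : g2[k].length = m.toNat := r2 _ (List.getElem_mem hk2)
  apply List.ext_getElem (by omega)
  intro j hj1 hj2
  have hx0 : (0:Int) ≤ (k:Int) := by omega
  have hxn : (k:Int) < n := by omega
  have hy0 : (0:Int) ≤ (j:Int) := by omega
  have hym : (j:Int) < m := by omega
  obtain ⟨hka, hja, ea⟩ := pvGet2_canon (-1 : Int) ⟨l1, r1⟩ hx0 hxn hy0 hym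
  obtain ⟨hkb, hjb, eb⟩ := pvGet2_canon (-1 : Int) ⟨l2, r2⟩ hx0 hxn hy0 hym
  have := h (k:Int) (j:Int) hx0 hxn hy0 hym
  rw [ea, eb] at this
  simpa using this

theorem pvGet2_rep (a b : Nat) (x y : Int) :
    pvGet2 (-1) (List.replicate a (List.replicate b (-1 : Int))) x y = -1 := by
  rcases Option.eq_none_or_eq_some
      (pvCellIdx? (List.replicate a (List.replicate b (-1 : Int))) x y) with h | ⟨⟨k, j⟩, h⟩
  · exact pvGet2_none_idx h
  · obtain ⟨hk, row, hr, hj⟩ := pvCellIdx?_some h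
    obtain ⟨hjl, e⟩ := pvGet2_some_idx (dfl := (-1:Int)) h hr
    have hrow : row = List.replicate b (-1 : Int) := by
      have := List.getElem?_eq_some_iff.mp hr
      obtain ⟨hkl, he⟩ := this
      rw [← he, List.getElem_replicate]
    rw [e]
    subst hrow
    simp

-- bridges between A's Option-valued board and the Int board pvMapF gives
theorem pvUnvisIff (f : List (List (Option Int))) (x y : Int) :
    pvGet2 (-1) (pvMapF f) x y = -1 ↔
      (pvGet2 none f x y = none ∨ pvGet2 none f x y = some (-1)) := by
  rw [pvMapF_get2]
  cases h : pvGet2 none f x y with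
  | none => simp
  | some v => simp

theorem pvValIff (f : List (List (Option Int))) (x y : Int) (v : Int) (hv : 0 ≤ v) :
    pvGet2 (-1) (pvMapF f) x y = v ↔ pvGet2 none f x y = some v := by
  rw [pvMapF_get2]
  cases h : pvGet2 none f x y with
  | none =>
    simp only [Option.getD_none]
    constructor
    · intro h'; omega
    · intro h'; simp at h'
  | some w => simp

-- ---------- the knight moves ----------

def pvStepA (n m d : Int) (c : Int × Int)
    (st2 : List (List (Option Int)) × List (List (Int × Int)) × Int) (mv : Int × Int) :
    List (List (Option Int)) × List (List (Int × Int)) × Int :=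
  let x := c.1 + mv.1
  let y := c.2 + mv.2
  if x < 0 ∨ n ≤ x then st2
  else if y < 0 ∨ m ≤ y then st2
  else if pvGet2 none st2.1 x y = none ∨ pvGet2 none st2.1 x y = some (-1) then
    let field' := pvSet2 st2.1 x y (some d)
    let ds := if (st2.2.1.length : Int) ≤ d then st2.2.1 ++ [[]] else st2.2.1
    let ds := PySem.List.pySetD ds d (PySem.List.pyGetD ds d [] ++ [(x, y)])
    (field', ds, d)
  else st2

theorem pvCellStepA_eq (n m : Int) (st : List (List (Option Int)) × List (List (Int × Int)) × Int)
    (cell : Int × Int) :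
    pvCellStepA n m st cell =
      pvMoves.foldl (pvStepA n m ((pvGet2 none st.1 cell.1 cell.2).getD 0 + 1) cell)
        (st.1, st.2.1, (pvGet2 none st.1 cell.1 cell.2).getD 0 + 1) := by
  unfold pvCellStepA
  conv_rhs => rw [show pvMoves = (PySem.List.pyRange 0 8 1).map
    (fun i => (PySem.List.pyGetD pvDx i 0, PySem.List.pyGetD pvDy i 0)) from by decide,
    List.foldl_map]
  rfl

theorem pvCellStepA_eq' (n m dd : Int) (field : List (List (Option Int)))
    (ds : List (List (Int × Int))) (cell : Int × Int) :
    pvCellStepA n m (field, ds, dd) cell =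
      pvMoves.foldl (pvStepA n m ((pvGet2 none field cell.1 cell.2).getD 0 + 1) cell)
        (field, ds, (pvGet2 none field cell.1 cell.2).getD 0 + 1) :=
  pvCellStepA_eq n m (field, ds, dd) cell

theorem pvMovesSymm : ∀ mv ∈ pvMoves, ((-mv.1, -mv.2)) ∈ pvMoves := by decide

-- ---------- the frontier-list bookkeeping of one write in A ----------

def pvRep (acc : List (Int × Int)) : List (List (Int × Int)) := if acc = [] then [] else [acc]

theorem pvSet_append_last {α : Type} (l : List α) (a v : α) :
    (l ++ [a]).set l.length v = l ++ [v] := by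
  induction l with
  | nil => rfl
  | cons x xs ih => simp [ih]

theorem pvDsUpdate (dn : Int) (hdn : 0 ≤ dn) (base : List (List (Int × Int)))
    (acc : List (Int × Int)) (w : Int × Int) (hb : base.length = (dn + 1).toNat) :
    (PySem.List.pySetD
      (if (((base ++ pvRep acc).length : Nat) : Int) ≤ dn + 1 then (base ++ pvRep acc) ++ [[]] else base ++ pvRep acc)
      (dn + 1)
      (PySem.List.pyGetD
        (if (((base ++ pvRep acc).length : Nat) : Int) ≤ dn + 1 then (base ++ pvRep acc) ++ [[]] else base ++ pvRep acc)
        (dn + 1) [] ++ [w]))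
    = base ++ pvRep (acc ++ [w]) := by
  have hcast : (dn + 1) = ((base.length : Nat) : Int) := by omega
  by_cases hacc : acc = []
  · subst hacc
    have r0 : pvRep ([] : List (Int × Int)) = [] := rfl
    have r1 : pvRep (([] : List (Int × Int)) ++ [w]) = [[w]] := rfl
    rw [r0, r1, List.append_nil]
    have hlen : ((base.length : Nat) : Int) ≤ dn + 1 := by omega
    rw [if_pos hlen, hcast, PySem.List.pyGetD_natCast, PySem.List.pySetD_natCast,
      List.getD_eq_getElem?_getD, List.getElem?_append_right (le_refl _)]
    simp only [Nat.sub_self, List.getElem?_cons_zero, Option.getD_some, List.nil_append]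
    exact pvSet_append_last base [] [w]
  · have r0 : pvRep acc = [acc] := by simp [pvRep, hacc]
    have r1 : pvRep (acc ++ [w]) = [acc ++ [w]] := by simp [pvRep]
    rw [r0, r1]
    have hlen : ¬ ((((base ++ [acc]).length : Nat) : Int) ≤ dn + 1) := by
      simp only [List.length_append, List.length_cons, List.length_nil]
      push_cast
      omega
    rw [if_neg hlen, hcast, PySem.List.pyGetD_natCast, PySem.List.pySetD_natCast,
      List.getD_eq_getElem?_getD, List.getElem?_append_right (le_refl _)]
    simp only [Nat.sub_self, List.getElem?_cons_zero, Option.getD_some]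
    exact pvSet_append_last base acc (acc ++ [w])

-- ---------- A's per-cell move loop, characterised pointwise ----------

theorem pvPercell (n m d : Int) (hd : 0 ≤ d) (c : Int × Int) :
    ∀ (mvs : List (Int × Int)) (field : List (List (Option Int)))
      (base : List (List (Int × Int))) (acc : List (Int × Int)),
    pvWF n m field → base.length = (d + 1).toNat →
    ∃ field' news,
      mvs.foldl (pvStepA n m (d + 1) c) (field, base ++ pvRep acc, d + 1)
        = (field', base ++ pvRep (acc ++ news), d + 1) ∧
      pvWF n m field' ∧
      (∀ x y : Int, 0 ≤ x → x < n → 0 ≤ y → y < m →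
        pvGet2 (-1) (pvMapF field') x y =
          if pvGet2 (-1) (pvMapF field) x y = -1 ∧ ∃ mv ∈ mvs, x = c.1 + mv.1 ∧ y = c.2 + mv.2
          then d + 1 else pvGet2 (-1) (pvMapF field) x y) ∧
      (∀ w : Int × Int, w ∈ news ↔ (0 ≤ w.1 ∧ w.1 < n ∧ 0 ≤ w.2 ∧ w.2 < m ∧
        pvGet2 (-1) (pvMapF field) w.1 w.2 = -1 ∧ ∃ mv ∈ mvs, w.1 = c.1 + mv.1 ∧ w.2 = c.2 + mv.2)) ∧
      pvUnvisA field' + news.length = pvUnvisA field ∧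
      (∀ x y : Int, pvGet2 none field x y ≠ none → pvGet2 none field' x y ≠ none) := by
  intro mvs
  induction mvs with
  | nil =>
    intro field base acc hWF hb
    refine ⟨field, [], by simp, hWF, ?_, ?_, by simp, fun _ _ h => h⟩
    · intro x y _ _ _ _
      rw [if_neg (by simp)]
    · intro w
      simp
  | cons mv mvs ih =>
    intro field base acc hWF hb
    by_cases hx : c.1 + mv.1 < 0 ∨ n ≤ c.1 + mv.1
    · have hA : pvStepA n m (d + 1) c (field, base ++ pvRep acc, d + 1) mv
          = (field, base ++ pvRep acc, d + 1) := by
        simp only [pvStepA]; rw [if_pos hx]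
      rw [List.foldl_cons, hA]
      obtain ⟨field', news, eA, hWF', hpt, hmem, hcnt, hmono⟩ := ih field base acc hWF hb
      refine ⟨field', news, eA, hWF', ?_, ?_, hcnt, hmono⟩
      · intro x y hx0 hxn hy0 hym
        rw [hpt x y hx0 hxn hy0 hym]
        congr 1
        have : (∃ mv' ∈ mv :: mvs, x = c.1 + mv'.1 ∧ y = c.2 + mv'.2)
            ↔ (∃ mv' ∈ mvs, x = c.1 + mv'.1 ∧ y = c.2 + mv'.2) := by
          constructor
          · rintro ⟨mv', hmv', e1, e2⟩
            rcases List.mem_cons.mp hmv' with h | h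
            · subst h; omega
            · exact ⟨mv', h, e1, e2⟩
          · rintro ⟨mv', hmv', e1, e2⟩
            exact ⟨mv', List.mem_cons_of_mem _ hmv', e1, e2⟩
        rw [eq_iff_iff]
        constructor
        · rintro ⟨h1, h2⟩; exact ⟨h1, this.mpr h2⟩
        · rintro ⟨h1, h2⟩; exact ⟨h1, this.mp h2⟩
      · intro w
        rw [hmem w]
        constructor
        · rintro ⟨a1, a2, a3, a4, a5, mv', hmv', e1, e2⟩
          exact ⟨a1, a2, a3, a4, a5, mv', List.mem_cons_of_mem _ hmv', e1, e2⟩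
        · rintro ⟨a1, a2, a3, a4, a5, mv', hmv', e1, e2⟩
          rcases List.mem_cons.mp hmv' with h | h
          · subst h; omega
          · exact ⟨a1, a2, a3, a4, a5, mv', h, e1, e2⟩
    · by_cases hy : c.2 + mv.2 < 0 ∨ m ≤ c.2 + mv.2
      · have hA : pvStepA n m (d + 1) c (field, base ++ pvRep acc, d + 1) mv
            = (field, base ++ pvRep acc, d + 1) := by
          simp only [pvStepA]; rw [if_neg hx, if_pos hy]
        rw [List.foldl_cons, hA]
        obtain ⟨field', news, eA, hWF', hpt, hmem, hcnt, hmono⟩ := ih field base acc hWF hb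
        refine ⟨field', news, eA, hWF', ?_, ?_, hcnt, hmono⟩
        · intro x y hx0 hxn hy0 hym
          rw [hpt x y hx0 hxn hy0 hym]
          congr 1
          rw [eq_iff_iff]
          constructor
          · rintro ⟨h1, mv', hmv', e1, e2⟩
            exact ⟨h1, mv', List.mem_cons_of_mem _ hmv', e1, e2⟩
          · rintro ⟨h1, mv', hmv', e1, e2⟩
            rcases List.mem_cons.mp hmv' with h | h
            · subst h; omega
            · exact ⟨h1, mv', h, e1, e2⟩
        · intro w
          rw [hmem w]
          constructor
          · rintro ⟨a1, a2, a3, a4, a5, mv', hmv', e1, e2⟩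
            exact ⟨a1, a2, a3, a4, a5, mv', List.mem_cons_of_mem _ hmv', e1, e2⟩
          · rintro ⟨a1, a2, a3, a4, a5, mv', hmv', e1, e2⟩
            rcases List.mem_cons.mp hmv' with h | h
            · subst h; omega
            · exact ⟨a1, a2, a3, a4, a5, mv', h, e1, e2⟩
      · push_neg at hx hy
        have hxr : PySem.Raise.InRange n.toNat (c.1 + mv.1) := pvInRange_of_bounds hx.1 hx.2
        have hyr : PySem.Raise.InRange m.toNat (c.2 + mv.2) := pvInRange_of_bounds hy.1 hy.2
        by_cases ht : pvGet2 none field (c.1 + mv.1) (c.2 + mv.2) = none ∨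
            pvGet2 none field (c.1 + mv.1) (c.2 + mv.2) = some (-1)
        · -- the write happens
          have htB : pvGet2 (-1) (pvMapF field) (c.1 + mv.1) (c.2 + mv.2) = -1 :=
            (pvUnvisIff field _ _).mpr ht
          have hA : pvStepA n m (d + 1) c (field, base ++ pvRep acc, d + 1) mv
              = (pvSet2 field (c.1 + mv.1) (c.2 + mv.2) (some (d + 1)),
                 base ++ pvRep (acc ++ [(c.1 + mv.1, c.2 + mv.2)]), d + 1) := by
            simp only [pvStepA]
            rw [if_neg (by omega), if_neg (by omega), if_pos ht]
            rw [pvDsUpdate d hd base acc _ hb]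
          rw [List.foldl_cons, hA]
          have hWF₁ : pvWF n m (pvSet2 field (c.1 + mv.1) (c.2 + mv.2) (some (d + 1))) :=
            pvWF_set2 hWF _ _ _
          obtain ⟨field', news', eA, hWF', hpt, hmem, hcnt, hmono⟩ :=
            ih (pvSet2 field (c.1 + mv.1) (c.2 + mv.2) (some (d + 1))) base
              (acc ++ [(c.1 + mv.1, c.2 + mv.2)]) hWF₁ hb
          have hmapset : pvMapF (pvSet2 field (c.1 + mv.1) (c.2 + mv.2) (some (d + 1)))
              = pvSet2 (pvMapF field) (c.1 + mv.1) (c.2 + mv.2) (d + 1) := pvMapF_set2 _ _ _ _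
          have hWFm : pvWF n m (pvMapF field) := pvMapF_WF hWF
          -- reads on the written board, for canonical coordinates
          have hget1 : ∀ x y : Int, 0 ≤ x → x < n → 0 ≤ y → y < m →
              pvGet2 (-1) (pvMapF (pvSet2 field (c.1 + mv.1) (c.2 + mv.2) (some (d + 1)))) x y
                = if x = c.1 + mv.1 ∧ y = c.2 + mv.2 then d + 1
                  else pvGet2 (-1) (pvMapF field) x y := by
            intro x y hx0 hxn hy0 hym
            rw [hmapset]
            by_cases hxy : x = c.1 + mv.1 ∧ y = c.2 + mv.2
            · obtain ⟨e1, e2⟩ := hxy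
              subst e1; subst e2
              rw [if_pos ⟨rfl, rfl⟩]
              exact pvGet2_set2_self (-1) (d + 1) hWFm hxr hyr
            · rw [if_neg hxy]
              exact pvGet2_set2_ne (-1) hWFm hx.1 hx.2 hy.1 hy.2 hx0 hxn hy0 hym hxy _
          refine ⟨field', (c.1 + mv.1, c.2 + mv.2) :: news', ?_, hWF', ?_, ?_, ?_, ?_⟩
          · rw [eA]
            congr 2
            simp
          · intro x y hx0 hxn hy0 hym
            rw [hpt x y hx0 hxn hy0 hym, hget1 x y hx0 hxn hy0 hym]
            by_cases hxy : x = c.1 + mv.1 ∧ y = c.2 + mv.2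
            · have hcondc : pvGet2 (-1) (pvMapF field) x y = -1 ∧
                  ∃ mv' ∈ mv :: mvs, x = c.1 + mv'.1 ∧ y = c.2 + mv'.2 := by
                refine ⟨?_, mv, List.mem_cons_self, hxy.1, hxy.2⟩
                rw [hxy.1, hxy.2]
                exact htB
              rw [if_pos hxy, if_neg (by intro hcon; have := hcon.1; omega), if_pos hcondc]
            · rw [if_neg hxy]
              by_cases hc2 : pvGet2 (-1) (pvMapF field) x y = -1 ∧
                  ∃ mv' ∈ mvs, x = c.1 + mv'.1 ∧ y = c.2 + mv'.2
              · have hcondc : pvGet2 (-1) (pvMapF field) x y = -1 ∧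
                    ∃ mv' ∈ mv :: mvs, x = c.1 + mv'.1 ∧ y = c.2 + mv'.2 := by
                  obtain ⟨mv', h1, h2⟩ := hc2.2
                  exact ⟨hc2.1, mv', List.mem_cons_of_mem _ h1, h2⟩
                rw [if_pos hc2, if_pos hcondc]
              · have hcondc : ¬(pvGet2 (-1) (pvMapF field) x y = -1 ∧
                    ∃ mv' ∈ mv :: mvs, x = c.1 + mv'.1 ∧ y = c.2 + mv'.2) := by
                  rintro ⟨h1, mv', hmv', e1, e2⟩
                  rcases List.mem_cons.mp hmv' with h | h
                  · subst h; exact hxy ⟨e1, e2⟩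
                  · exact hc2 ⟨h1, mv', h, e1, e2⟩
                rw [if_neg hc2, if_neg hcondc]
          · intro w
            rw [List.mem_cons, hmem w]
            constructor
            · rintro (hw | ⟨a1, a2, a3, a4, a5, mv', hmv', e1, e2⟩)
              · subst hw
                exact ⟨hx.1, hx.2, hy.1, hy.2, htB, mv, List.mem_cons_self, rfl, rfl⟩
              · rw [hget1 w.1 w.2 a1 a2 a3 a4] at a5
                by_cases hxy : w.1 = c.1 + mv.1 ∧ w.2 = c.2 + mv.2
                · rw [if_pos hxy] at a5; omega
                · rw [if_neg hxy] at a5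
                  exact ⟨a1, a2, a3, a4, a5, mv', List.mem_cons_of_mem _ hmv', e1, e2⟩
            · rintro ⟨a1, a2, a3, a4, a5, mv', hmv', e1, e2⟩
              by_cases hxy : w.1 = c.1 + mv.1 ∧ w.2 = c.2 + mv.2
              · left
                obtain ⟨f1, f2⟩ := hxy
                exact Prod.ext f1 f2
              · right
                rcases List.mem_cons.mp hmv' with h | h
                · exfalso; apply hxy; subst h; exact ⟨e1, e2⟩
                · refine ⟨a1, a2, a3, a4, ?_, mv', h, e1, e2⟩
                  rw [hget1 w.1 w.2 a1 a2 a3 a4, if_neg hxy]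
                  exact a5
          · -- unvisited count
            obtain ⟨k, j, row, hc, hr, hjl⟩ := pvCellIdx?_of_inRange hWFm hxr hyr
            have hdec := pvUnvis_set2 hc hr htB (v := d + 1) (by omega)
            unfold pvUnvisA at hcnt ⊢
            rw [hmapset] at hcnt
            simp only [List.length_cons]
            omega
          · intro x y hne
            apply hmono
            rcases pvGet2_set2_cases (none : Option Int) field (c.1 + mv.1) (c.2 + mv.2)
                x y (some (d + 1)) with h | ⟨h1, _⟩
            · rw [h]; exact hne
            · rw [h1]; simp
        · -- no write
          have htB : pvGet2 (-1) (pvMapF field) (c.1 + mv.1) (c.2 + mv.2) ≠ -1 := by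
            intro hcon
            exact ht ((pvUnvisIff field _ _).mp hcon)
          have hA : pvStepA n m (d + 1) c (field, base ++ pvRep acc, d + 1) mv
              = (field, base ++ pvRep acc, d + 1) := by
            simp only [pvStepA]
            rw [if_neg (by omega), if_neg (by omega), if_neg ht]
          rw [List.foldl_cons, hA]
          obtain ⟨field', news, eA, hWF', hpt, hmem, hcnt, hmono⟩ := ih field base acc hWF hb
          refine ⟨field', news, eA, hWF', ?_, ?_, hcnt, hmono⟩
          · intro x y hx0 hxn hy0 hym
            rw [hpt x y hx0 hxn hy0 hym]
            congr 1
            rw [eq_iff_iff]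
            constructor
            · rintro ⟨h1, mv', hmv', e1, e2⟩
              exact ⟨h1, mv', List.mem_cons_of_mem _ hmv', e1, e2⟩
            · rintro ⟨h1, mv', hmv', e1, e2⟩
              rcases List.mem_cons.mp hmv' with h | h
              · exfalso; subst h; rw [e1, e2] at h1; exact htB h1
              · exact ⟨h1, mv', h, e1, e2⟩
          · intro w
            rw [hmem w]
            constructor
            · rintro ⟨a1, a2, a3, a4, a5, mv', hmv', e1, e2⟩
              exact ⟨a1, a2, a3, a4, a5, mv', List.mem_cons_of_mem _ hmv', e1, e2⟩
            · rintro ⟨a1, a2, a3, a4, a5, mv', hmv', e1, e2⟩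
              rcases List.mem_cons.mp hmv' with h | h
              · exfalso; subst h; rw [e1, e2] at a5; exact htB a5
              · exact ⟨a1, a2, a3, a4, a5, mv', h, e1, e2⟩

-- ---------- A's whole-level loop, characterised pointwise ----------

theorem pvLevel (n m d : Int) (hd : 0 ≤ d) :
    ∀ (L : List (Int × Int)) (field : List (List (Option Int)))
      (base : List (List (Int × Int))) (acc : List (Int × Int)) (dd : Int),
    pvWF n m field → base.length = (d + 1).toNat →
    (∀ c ∈ L, 0 ≤ c.1 ∧ c.1 < n ∧ 0 ≤ c.2 ∧ c.2 < m) →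
    (∀ c ∈ L, pvGet2 (-1) (pvMapF field) c.1 c.2 = d) →
    ∃ field' news,
      L.foldl (pvCellStepA n m) (field, base ++ pvRep acc, dd)
        = (field', base ++ pvRep (acc ++ news), if L = [] then dd else d + 1) ∧
      pvWF n m field' ∧
      (∀ x y : Int, 0 ≤ x → x < n → 0 ≤ y → y < m →
        pvGet2 (-1) (pvMapF field') x y =
          if pvGet2 (-1) (pvMapF field) x y = -1 ∧
              ∃ l ∈ L, ∃ mv ∈ pvMoves, x = l.1 + mv.1 ∧ y = l.2 + mv.2
          then d + 1 else pvGet2 (-1) (pvMapF field) x y) ∧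
      (∀ w : Int × Int, w ∈ news ↔ (0 ≤ w.1 ∧ w.1 < n ∧ 0 ≤ w.2 ∧ w.2 < m ∧
        pvGet2 (-1) (pvMapF field) w.1 w.2 = -1 ∧
        ∃ l ∈ L, ∃ mv ∈ pvMoves, w.1 = l.1 + mv.1 ∧ w.2 = l.2 + mv.2)) ∧
      pvUnvisA field' + news.length = pvUnvisA field ∧
      (∀ x y : Int, pvGet2 none field x y ≠ none → pvGet2 none field' x y ≠ none) := by
  intro L
  induction L with
  | nil =>
    intro field base acc dd hWF hb _ _
    refine ⟨field, [], by simp, hWF, ?_, ?_, by simp, fun _ _ h => h⟩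
    · intro x y _ _ _ _
      rw [if_neg (by simp)]
    · intro w; simp
  | cons c L' ih =>
    intro field base acc dd hWF hb hcan hval
    have hcv : pvGet2 (-1) (pvMapF field) c.1 c.2 = d := hval c List.mem_cons_self
    have hcvo : pvGet2 none field c.1 c.2 = some d := (pvValIff field c.1 c.2 d hd).mp hcv
    have hdst : (pvGet2 none field c.1 c.2).getD 0 + 1 = d + 1 := by rw [hcvo]; rfl
    rw [List.foldl_cons, pvCellStepA_eq', hdst]
    obtain ⟨field₁, news₁, eA₁, hWF₁, hpt₁, hmem₁, hcnt₁, hmono₁⟩ :=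
      pvPercell n m d hd c pvMoves field base acc hWF hb
    rw [eA₁]
    have hcanc := hcan c List.mem_cons_self
    -- the per-cell predicate for cell c
    have hval' : ∀ c' ∈ L', pvGet2 (-1) (pvMapF field₁) c'.1 c'.2 = d := by
      intro c' hc'
      have hcc := hcan c' (List.mem_cons_of_mem _ hc')
      rw [hpt₁ c'.1 c'.2 hcc.1 hcc.2.1 hcc.2.2.1 hcc.2.2.2]
      rw [if_neg ?_]
      · exact hval c' (List.mem_cons_of_mem _ hc')
      · rintro ⟨h1, _⟩
        rw [hval c' (List.mem_cons_of_mem _ hc')] at h1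
        omega
    obtain ⟨field', news₂, eA₂, hWF', hpt₂, hmem₂, hcnt₂, hmono₂⟩ :=
      ih field₁ base (acc ++ news₁) (d + 1) hWF₁ hb
        (fun c' hc' => hcan c' (List.mem_cons_of_mem _ hc')) hval'
    refine ⟨field', news₁ ++ news₂, ?_, hWF', ?_, ?_, ?_, ?_⟩
    · rw [eA₂]
      have e3 : (if c :: L' = [] then dd else d + 1) = d + 1 := by simp
      rw [e3]
      by_cases hL' : L' = []
      · subst hL'
        simp
      · rw [if_neg hL']
        congr 2
        simp [List.append_assoc]
    · intro x y hx0 hxn hy0 hym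
      have e1 := hpt₁ x y hx0 hxn hy0 hym
      rw [hpt₂ x y hx0 hxn hy0 hym]
      by_cases h0 : pvGet2 (-1) (pvMapF field) x y = -1
      · by_cases hadj : ∃ mv ∈ pvMoves, x = c.1 + mv.1 ∧ y = c.2 + mv.2
        · have v1 : pvGet2 (-1) (pvMapF field₁) x y = d + 1 := by
            rw [e1, if_pos ⟨h0, hadj⟩]
          rw [v1, if_neg (by intro hcon; have := hcon.1; omega),
            if_pos ⟨h0, c, List.mem_cons_self, hadj⟩]
        · have v1 : pvGet2 (-1) (pvMapF field₁) x y = pvGet2 (-1) (pvMapF field) x y := by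
            rw [e1, if_neg (fun hcon => hadj hcon.2)]
          rw [v1]
          by_cases hrest : ∃ l ∈ L', ∃ mv ∈ pvMoves, x = l.1 + mv.1 ∧ y = l.2 + mv.2
          · have hcons : ∃ l ∈ c :: L', ∃ mv ∈ pvMoves, x = l.1 + mv.1 ∧ y = l.2 + mv.2 := by
              obtain ⟨l, hl, hmv⟩ := hrest
              exact ⟨l, List.mem_cons_of_mem _ hl, hmv⟩
            rw [if_pos ⟨h0, hrest⟩, if_pos ⟨h0, hcons⟩]
          · have hncons : ¬(pvGet2 (-1) (pvMapF field) x y = -1 ∧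
                ∃ l ∈ c :: L', ∃ mv ∈ pvMoves, x = l.1 + mv.1 ∧ y = l.2 + mv.2) := by
              rintro ⟨h1, l, hl, hmv⟩
              rcases List.mem_cons.mp hl with h | h
              · subst h; exact hadj hmv
              · exact hrest ⟨l, h, hmv⟩
            rw [if_neg (fun hcon => hrest hcon.2), if_neg hncons]
      · have v1 : pvGet2 (-1) (pvMapF field₁) x y = pvGet2 (-1) (pvMapF field) x y := by
          rw [e1, if_neg (fun hcon => h0 hcon.1)]
        rw [v1, if_neg (fun hcon => h0 hcon.1), if_neg (fun hcon => h0 hcon.1)]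
    · intro w
      rw [List.mem_append, hmem₁ w, hmem₂ w]
      constructor
      · rintro (⟨a1, a2, a3, a4, a5, hmv⟩ | ⟨a1, a2, a3, a4, a5, l, hl, hmv⟩)
        · exact ⟨a1, a2, a3, a4, a5, c, List.mem_cons_self, hmv⟩
        · rw [hpt₁ w.1 w.2 a1 a2 a3 a4] at a5
          by_cases hcon : pvGet2 (-1) (pvMapF field) w.1 w.2 = -1 ∧
              ∃ mv ∈ pvMoves, w.1 = c.1 + mv.1 ∧ w.2 = c.2 + mv.2
          · rw [if_pos hcon] at a5; omega
          · rw [if_neg hcon] at a5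
            exact ⟨a1, a2, a3, a4, a5, l, List.mem_cons_of_mem _ hl, hmv⟩
      · rintro ⟨a1, a2, a3, a4, a5, l, hl, hmv⟩
        by_cases hadj : ∃ mv ∈ pvMoves, w.1 = c.1 + mv.1 ∧ w.2 = c.2 + mv.2
        · exact Or.inl ⟨a1, a2, a3, a4, a5, hadj⟩
        · right
          rcases List.mem_cons.mp hl with h | h
          · exfalso; subst h; exact hadj hmv
          · refine ⟨a1, a2, a3, a4, ?_, l, h, hmv⟩
            rw [hpt₁ w.1 w.2 a1 a2 a3 a4, if_neg (fun hcon => hadj hcon.2)]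
            exact a5
    · simp only [List.length_append]
      omega
    · intro x y hne
      exact hmono₂ x y (hmono₁ x y hne)

-- ---------- B's sweep, characterised pointwise ----------

-- the marking predicate of one wavefront step, on the board as it was before the sweep
abbrev pvP (n m d : Int) (g0 : List (List Int)) (x y : Int) : Prop :=
  pvGet2 (-1) g0 x y = -1 ∧ ∃ mv ∈ pvMoves,
    0 ≤ x + mv.1 ∧ x + mv.1 < n ∧ 0 ≤ y + mv.2 ∧ y + mv.2 < m ∧
    pvGet2 (-1) g0 (x + mv.1) (y + mv.2) = d

abbrev pvBefore (X Y x y : Int) : Prop := x < X ∨ (x = X ∧ y < Y)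

-- sweep invariant: cells strictly before (X, Y) in row-major order have been processed
def pvSInv (n m d : Int) (g0 g : List (List Int)) (ch : Bool) (X Y : Int) : Prop :=
  pvWF n m g ∧
  (∀ x y : Int, 0 ≤ x → x < n → 0 ≤ y → y < m →
    pvGet2 (-1) g x y =
      if pvP n m d g0 x y ∧ pvBefore X Y x y then d + 1 else pvGet2 (-1) g0 x y) ∧
  (ch = true ↔ ∃ x y : Int, 0 ≤ x ∧ x < n ∧ 0 ≤ y ∧ y < m ∧
    pvP n m d g0 x y ∧ pvBefore X Y x y) ∧
  pvUnvis g ≤ pvUnvis g0 ∧ (ch = true → pvUnvis g < pvUnvis g0)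

theorem pvSInv_congr {n m d : Int} {g0 g : List (List Int)} {ch : Bool} {X Y X' Y' : Int}
    (hb : ∀ x y : Int, 0 ≤ x → x < n → 0 ≤ y → y < m → (pvBefore X Y x y ↔ pvBefore X' Y' x y))
    (h : pvSInv n m d g0 g ch X Y) : pvSInv n m d g0 g ch X' Y' := by
  obtain ⟨h1, h2, h3, h4, h5⟩ := h
  refine ⟨h1, ?_, ?_, h4, h5⟩
  · intro x y hx0 hxn hy0 hym
    rw [h2 x y hx0 hxn hy0 hym]
    by_cases hc : pvP n m d g0 x y ∧ pvBefore X Y x y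
    · rw [if_pos hc, if_pos ⟨hc.1, (hb x y hx0 hxn hy0 hym).mp hc.2⟩]
    · rw [if_neg hc, if_neg ?_]
      rintro ⟨p1, p2⟩
      exact hc ⟨p1, (hb x y hx0 hxn hy0 hym).mpr p2⟩
  · rw [h3]
    constructor
    · rintro ⟨x, y, a1, a2, a3, a4, a5, a6⟩
      exact ⟨x, y, a1, a2, a3, a4, a5, (hb x y a1 a2 a3 a4).mp a6⟩
    · rintro ⟨x, y, a1, a2, a3, a4, a5, a6⟩
      exact ⟨x, y, a1, a2, a3, a4, a5, (hb x y a1 a2 a3 a4).mpr a6⟩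

theorem pvSweepCell (n m d : Int) (hd : 0 ≤ d) (g0 g : List (List Int)) (ch : Bool)
    (X Y : Int) (hX0 : 0 ≤ X) (hXn : X < n) (hY0 : 0 ≤ Y) (hYm : Y < m)
    (hinv : pvSInv n m d g0 g ch X Y) :
    pvSInv n m d g0 (pvSweepBody n m d X (g, ch) Y).1 (pvSweepBody n m d X (g, ch) Y).2 X (Y + 1) := by
  obtain ⟨hWF, hpt, hch, hle, hlt⟩ := hinv
  have hcur : pvGet2 (-1) g X Y = pvGet2 (-1) g0 X Y := by
    rw [hpt X Y hX0 hXn hY0 hYm, if_neg ?_]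
    rintro ⟨_, hbf⟩
    rcases hbf with h | h
    · omega
    · omega
  have hnbr : ∀ mv : Int × Int, 0 ≤ X + mv.1 → X + mv.1 < n → 0 ≤ Y + mv.2 → Y + mv.2 < m →
      (pvGet2 (-1) g (X + mv.1) (Y + mv.2) = d ↔ pvGet2 (-1) g0 (X + mv.1) (Y + mv.2) = d) := by
    intro mv a1 a2 a3 a4
    rw [hpt _ _ a1 a2 a3 a4]
    by_cases hc : pvP n m d g0 (X + mv.1) (Y + mv.2) ∧ pvBefore X Y (X + mv.1) (Y + mv.2)
    · rw [if_pos hc]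
      constructor
      · intro h'; omega
      · intro h'
        exfalso
        have := hc.1.1
        omega
    · rw [if_neg hc]
  have hcond : (pvGet2 (-1) g X Y = -1 ∧ ∃ mv ∈ pvMoves,
      0 ≤ X + mv.1 ∧ X + mv.1 < n ∧ 0 ≤ Y + mv.2 ∧ Y + mv.2 < m ∧
      pvGet2 (-1) g (X + mv.1) (Y + mv.2) = d) ↔ pvP n m d g0 X Y := by
    unfold pvP
    rw [hcur]
    constructor
    · rintro ⟨h1, mv, hmv, a1, a2, a3, a4, a5⟩
      exact ⟨h1, mv, hmv, a1, a2, a3, a4, (hnbr mv a1 a2 a3 a4).mp a5⟩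
    · rintro ⟨h1, mv, hmv, a1, a2, a3, a4, a5⟩
      exact ⟨h1, mv, hmv, a1, a2, a3, a4, (hnbr mv a1 a2 a3 a4).mpr a5⟩
  by_cases hC : pvGet2 (-1) g X Y = -1 ∧ ∃ mv ∈ pvMoves,
      0 ≤ X + mv.1 ∧ X + mv.1 < n ∧ 0 ≤ Y + mv.2 ∧ Y + mv.2 < m ∧
      pvGet2 (-1) g (X + mv.1) (Y + mv.2) = d
  · have hP : pvP n m d g0 X Y := hcond.mp hC
    have hbody : pvSweepBody n m d X (g, ch) Y = (pvSet2 g X Y (d + 1), true) := by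
      unfold pvSweepBody
      rw [if_pos hC]
    rw [hbody]
    show pvSInv n m d g0 (pvSet2 g X Y (d + 1)) true X (Y + 1)
    have hXr : PySem.Raise.InRange n.toNat X := pvInRange_of_bounds hX0 hXn
    have hYr : PySem.Raise.InRange m.toNat Y := pvInRange_of_bounds hY0 hYm
    have hPB : pvP n m d g0 X Y ∧ pvBefore X (Y + 1) X Y := ⟨hP, Or.inr ⟨rfl, by omega⟩⟩
    refine ⟨pvWF_set2 hWF _ _ _, ?_, ?_, ?_, ?_⟩
    · intro x y hx0 hxn hy0 hym
      by_cases hxy : x = X ∧ y = Y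
      · obtain ⟨e1, e2⟩ := hxy
        subst e1; subst e2
        rw [pvGet2_set2_self (-1) (d + 1) hWF hXr hYr, if_pos hPB]
      · rw [pvGet2_set2_ne (-1) hWF hX0 hXn hY0 hYm hx0 hxn hy0 hym hxy _,
          hpt x y hx0 hxn hy0 hym]
        have hbf : pvBefore X (Y + 1) x y ↔ pvBefore X Y x y := by
          unfold pvBefore
          constructor
          · rintro (h | ⟨e, h⟩)
            · exact Or.inl h
            · right
              refine ⟨e, ?_⟩
              by_contra hcon
              exact hxy ⟨e, by omega⟩
          · rintro (h | ⟨e, h⟩)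
            · exact Or.inl h
            · exact Or.inr ⟨e, by omega⟩
        by_cases hc : pvP n m d g0 x y ∧ pvBefore X Y x y
        · rw [if_pos hc, if_pos ⟨hc.1, hbf.mpr hc.2⟩]
        · rw [if_neg hc, if_neg (fun hcon => hc ⟨hcon.1, hbf.mp hcon.2⟩)]
    · constructor
      · intro _
        exact ⟨X, Y, hX0, hXn, hY0, hYm, hP, Or.inr ⟨rfl, by omega⟩⟩
      · intro _; rfl
    · obtain ⟨k, j, row, hci, hr, _⟩ := pvCellIdx?_of_inRange hWF hXr hYr
      have := pvUnvis_set2 hci hr hC.1 (v := d + 1) (by omega)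
      omega
    · intro _
      obtain ⟨k, j, row, hci, hr, _⟩ := pvCellIdx?_of_inRange hWF hXr hYr
      have := pvUnvis_set2 hci hr hC.1 (v := d + 1) (by omega)
      omega
  · have hP : ¬ pvP n m d g0 X Y := fun h => hC (hcond.mpr h)
    have hbody : pvSweepBody n m d X (g, ch) Y = (g, ch) := by
      unfold pvSweepBody
      rw [if_neg hC]
    rw [hbody]
    show pvSInv n m d g0 g ch X (Y + 1)
    refine ⟨hWF, ?_, ?_, hle, hlt⟩
    · intro x y hx0 hxn hy0 hym
      rw [hpt x y hx0 hxn hy0 hym]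
      by_cases hxy : x = X ∧ y = Y
      · obtain ⟨e1, e2⟩ := hxy
        subst e1; subst e2
        rw [if_neg (fun hcon => hP hcon.1), if_neg (fun hcon => hP hcon.1)]
      · have hbf : pvBefore X Y x y ↔ pvBefore X (Y + 1) x y := by
          unfold pvBefore
          constructor
          · rintro (h | ⟨e, h⟩)
            · exact Or.inl h
            · exact Or.inr ⟨e, by omega⟩
          · rintro (h | ⟨e, h⟩)
            · exact Or.inl h
            · right
              refine ⟨e, ?_⟩
              by_contra hcon
              exact hxy ⟨e, by omega⟩
        by_cases hc : pvP n m d g0 x y ∧ pvBefore X Y x y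
        · rw [if_pos hc, if_pos ⟨hc.1, hbf.mp hc.2⟩]
        · rw [if_neg hc, if_neg (fun hcon => hc ⟨hcon.1, hbf.mpr hcon.2⟩)]
    · rw [hch]
      constructor
      · rintro ⟨x, y, a1, a2, a3, a4, a5, a6⟩
        refine ⟨x, y, a1, a2, a3, a4, a5, ?_⟩
        rcases a6 with h | ⟨e, h⟩
        · exact Or.inl h
        · exact Or.inr ⟨e, by omega⟩
      · rintro ⟨x, y, a1, a2, a3, a4, a5, a6⟩
        refine ⟨x, y, a1, a2, a3, a4, a5, ?_⟩
        rcases a6 with h | ⟨e, h⟩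
        · exact Or.inl h
        · right
          refine ⟨e, ?_⟩
          by_contra hcon
          apply hP
          have hxx : x = X := e
          have hyy : y = Y := by omega
          rw [← hxx, ← hyy]
          exact a5

theorem pvSweepRowAux (n m d : Int) (hd : 0 ≤ d) (g0 : List (List Int))
    (X : Int) (hX0 : 0 ≤ X) (hXn : X < n) :
    ∀ (k : Nat) (Y : Int) (g : List (List Int)) (ch : Bool), (m - Y).toNat = k → 0 ≤ Y →
      pvSInv n m d g0 g ch X Y →
      pvSInv n m d g0 ((PySem.List.pyRange Y m 1).foldl (pvSweepBody n m d X) (g, ch)).1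
        ((PySem.List.pyRange Y m 1).foldl (pvSweepBody n m d X) (g, ch)).2 X m := by
  intro k
  induction k with
  | zero =>
    intro Y g ch hk hY0 hinv
    have hYm : m ≤ Y := by omega
    rw [PySem.List.pyRange_one_eq_nil hYm]
    simp only [List.foldl_nil]
    refine pvSInv_congr ?_ hinv
    intro x y hx0 hxn hy0 hym
    unfold pvBefore
    constructor
    · rintro (h | ⟨e, h⟩)
      · exact Or.inl h
      · exact Or.inr ⟨e, by omega⟩
    · rintro (h | ⟨e, h⟩)
      · exact Or.inl h
      · exact Or.inr ⟨e, by omega⟩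
  | succ k ih =>
    intro Y g ch hk hY0 hinv
    have hYm : Y < m := by omega
    rw [PySem.List.pyRange_one_cons hYm, List.foldl_cons]
    have hstep := pvSweepCell n m d hd g0 g ch X Y hX0 hXn hY0 hYm hinv
    have := ih (Y + 1) (pvSweepBody n m d X (g, ch) Y).1 (pvSweepBody n m d X (g, ch) Y).2
      (by omega) (by omega) hstep
    simpa using this

theorem pvSweepRowsAux (n m d : Int) (hd : 0 ≤ d) (g0 : List (List Int)) :
    ∀ (k : Nat) (X : Int) (g : List (List Int)) (ch : Bool), (n - X).toNat = k → 0 ≤ X →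
      pvSInv n m d g0 g ch X 0 →
      pvSInv n m d g0
        ((PySem.List.pyRange X n 1).foldl (fun st x =>
          (PySem.List.pyRange 0 m 1).foldl (pvSweepBody n m d x) st) (g, ch)).1
        ((PySem.List.pyRange X n 1).foldl (fun st x =>
          (PySem.List.pyRange 0 m 1).foldl (pvSweepBody n m d x) st) (g, ch)).2 n 0 := by
  intro k
  induction k with
  | zero =>
    intro X g ch hk hX0 hinv
    have hXn : n ≤ X := by omega
    rw [PySem.List.pyRange_one_eq_nil hXn]
    simp only [List.foldl_nil]
    refine pvSInv_congr ?_ hinv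
    intro x y hx0 hxn hy0 hym
    unfold pvBefore
    constructor
    · rintro (h | ⟨e, h⟩) <;> omega
    · rintro (h | ⟨e, h⟩) <;> omega
  | succ k ih =>
    intro X g ch hk hX0 hinv
    have hXn : X < n := by omega
    rw [PySem.List.pyRange_one_cons hXn, List.foldl_cons]
    have hrow := pvSweepRowAux n m d hd g0 X hX0 hXn (m - 0).toNat 0 g ch rfl (le_refl 0) hinv
    have hrow' : pvSInv n m d g0
        ((PySem.List.pyRange 0 m 1).foldl (pvSweepBody n m d X) (g, ch)).1
        ((PySem.List.pyRange 0 m 1).foldl (pvSweepBody n m d X) (g, ch)).2 (X + 1) 0 := by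
      refine pvSInv_congr ?_ hrow
      intro x y hx0 hxn hy0 hym
      unfold pvBefore
      constructor
      · rintro (h | ⟨e, h⟩) <;> omega
      · rintro (h | ⟨e, h⟩) <;> omega
    exact ih (X + 1) _ _ (by omega) (by omega) hrow'

theorem pvSweepChar (n m d : Int) (hd : 0 ≤ d) (g0 : List (List Int)) (hWF : pvWF n m g0) :
    pvWF n m (pvSweep n m d g0).1 ∧
    (∀ x y : Int, 0 ≤ x → x < n → 0 ≤ y → y < m →
      pvGet2 (-1) (pvSweep n m d g0).1 x y =
        if pvP n m d g0 x y then d + 1 else pvGet2 (-1) g0 x y) ∧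
    ((pvSweep n m d g0).2 = true ↔ ∃ x y : Int, 0 ≤ x ∧ x < n ∧ 0 ≤ y ∧ y < m ∧ pvP n m d g0 x y) ∧
    pvUnvis (pvSweep n m d g0).1 ≤ pvUnvis g0 ∧
    ((pvSweep n m d g0).2 = true → pvUnvis (pvSweep n m d g0).1 < pvUnvis g0) := by
  unfold pvSweep
  have hinit : pvSInv n m d g0 g0 false 0 0 := by
    refine ⟨hWF, ?_, ?_, le_refl _, by simp⟩
    · intro x y hx0 hxn hy0 hym
      rw [if_neg ?_]
      rintro ⟨_, h | ⟨e, h⟩⟩ <;> omega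
    · constructor
      · intro h; simp at h
      · rintro ⟨x, y, a1, a2, a3, a4, _, h | ⟨e, h⟩⟩ <;> omega
  have hfin := pvSweepRowsAux n m d hd g0 (n - 0).toNat 0 g0 false rfl (le_refl 0) hinit
  obtain ⟨h1, h2, h3, h4, h5⟩ := hfin
  refine ⟨h1, ?_, ?_, h4, h5⟩
  · intro x y hx0 hxn hy0 hym
    have := h2 x y hx0 hxn hy0 hym
    rw [this]
    by_cases hc : pvP n m d g0 x y
    · rw [if_pos ⟨hc, Or.inl hxn⟩, if_pos hc]
    · rw [if_neg (fun h => hc h.1), if_neg hc]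
  · rw [h3]
    constructor
    · rintro ⟨x, y, a1, a2, a3, a4, a5, _⟩
      exact ⟨x, y, a1, a2, a3, a4, a5⟩
    · rintro ⟨x, y, a1, a2, a3, a4, a5⟩
      exact ⟨x, y, a1, a2, a3, a4, a5, Or.inl a2⟩

-- ---------- the two marking predicates coincide on a level ----------

theorem pvBridge (n m d : Int) (g0 : List (List Int)) (hd : 0 ≤ d) (L : List (Int × Int))
    (hcan : ∀ c ∈ L, 0 ≤ c.1 ∧ c.1 < n ∧ 0 ≤ c.2 ∧ c.2 < m)
    (hval : ∀ c ∈ L, pvGet2 (-1) g0 c.1 c.2 = d)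
    (hcomp : ∀ x y : Int, 0 ≤ x → x < n → 0 ≤ y → y < m →
      pvGet2 (-1) g0 x y = d → (x, y) ∈ L) :
    ∀ x y : Int, 0 ≤ x → x < n → 0 ≤ y → y < m →
      ((pvGet2 (-1) g0 x y = -1 ∧ ∃ l ∈ L, ∃ mv ∈ pvMoves, x = l.1 + mv.1 ∧ y = l.2 + mv.2)
        ↔ pvP n m d g0 x y) := by
  intro x y hx0 hxn hy0 hym
  constructor
  · rintro ⟨h1, l, hl, mv, hmv, e1, e2⟩
    refine ⟨h1, (-mv.1, -mv.2), pvMovesSymm mv hmv, ?_⟩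
    obtain ⟨a1, a2, a3, a4⟩ := hcan l hl
    have ex : x + -mv.1 = l.1 := by omega
    have ey : y + -mv.2 = l.2 := by omega
    refine ⟨by omega, by omega, by omega, by omega, ?_⟩
    rw [ex, ey]
    exact hval l hl
  · rintro ⟨h1, mv, hmv, a1, a2, a3, a4, a5⟩
    refine ⟨h1, (x + mv.1, y + mv.2), hcomp _ _ a1 a2 a3 a4 a5,
      (-mv.1, -mv.2), pvMovesSymm mv hmv, by simp, by simp⟩

-- ---------- B's seeding loop, characterised pointwise ----------

theorem pvSeedChar (n m s t : Int) :
    ∀ (mvs : List (Int × Int)) (g : List (List Int)), pvWF n m g →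
    pvWF n m (mvs.foldl (fun g mv =>
      if 0 ≤ s + mv.1 ∧ s + mv.1 < n ∧ 0 ≤ t + mv.2 ∧ t + mv.2 < m ∧
          pvGet2 (-1) g (s + mv.1) (t + mv.2) = -1
      then pvSet2 g (s + mv.1) (t + mv.2) 1 else g) g) ∧
    (∀ x y : Int, 0 ≤ x → x < n → 0 ≤ y → y < m →
      pvGet2 (-1) (mvs.foldl (fun g mv =>
        if 0 ≤ s + mv.1 ∧ s + mv.1 < n ∧ 0 ≤ t + mv.2 ∧ t + mv.2 < m ∧
            pvGet2 (-1) g (s + mv.1) (t + mv.2) = -1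
        then pvSet2 g (s + mv.1) (t + mv.2) 1 else g) g) x y =
        if pvGet2 (-1) g x y = -1 ∧ ∃ mv ∈ mvs, x = s + mv.1 ∧ y = t + mv.2
        then 1 else pvGet2 (-1) g x y) := by
  intro mvs
  induction mvs with
  | nil =>
    intro g hWF
    refine ⟨hWF, ?_⟩
    intro x y _ _ _ _
    rw [List.foldl_nil, if_neg (by simp)]
  | cons mv mvs ih =>
    intro g hWF
    rw [List.foldl_cons]
    by_cases hC : 0 ≤ s + mv.1 ∧ s + mv.1 < n ∧ 0 ≤ t + mv.2 ∧ t + mv.2 < m ∧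
        pvGet2 (-1) g (s + mv.1) (t + mv.2) = -1
    · rw [if_pos hC]
      obtain ⟨hb1, hb2, hb3, hb4, hv⟩ := hC
      have hWF1 : pvWF n m (pvSet2 g (s + mv.1) (t + mv.2) 1) := pvWF_set2 hWF _ _ _
      obtain ⟨hWF', hpt⟩ := ih (pvSet2 g (s + mv.1) (t + mv.2) 1) hWF1
      refine ⟨hWF', ?_⟩
      intro x y hx0 hxn hy0 hym
      rw [hpt x y hx0 hxn hy0 hym]
      have hget1 : pvGet2 (-1) (pvSet2 g (s + mv.1) (t + mv.2) 1) x y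
          = if x = s + mv.1 ∧ y = t + mv.2 then 1 else pvGet2 (-1) g x y := by
        by_cases hxy : x = s + mv.1 ∧ y = t + mv.2
        · obtain ⟨e1, e2⟩ := hxy
          subst e1; subst e2
          rw [if_pos ⟨rfl, rfl⟩]
          exact pvGet2_set2_self (-1) 1 hWF (pvInRange_of_bounds hb1 hb2)
            (pvInRange_of_bounds hb3 hb4)
        · rw [if_neg hxy]
          exact pvGet2_set2_ne (-1) hWF hb1 hb2 hb3 hb4 hx0 hxn hy0 hym hxy _
      rw [hget1]
      by_cases hxy : x = s + mv.1 ∧ y = t + mv.2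
      · have hcondc : pvGet2 (-1) g x y = -1 ∧
            ∃ mv' ∈ mv :: mvs, x = s + mv'.1 ∧ y = t + mv'.2 := by
          refine ⟨?_, mv, List.mem_cons_self, hxy.1, hxy.2⟩
          rw [hxy.1, hxy.2]
          exact hv
        rw [if_pos hxy, if_neg (by intro hcon; have := hcon.1; omega), if_pos hcondc]
      · rw [if_neg hxy]
        by_cases hc2 : pvGet2 (-1) g x y = -1 ∧ ∃ mv' ∈ mvs, x = s + mv'.1 ∧ y = t + mv'.2
        · have hcondc : pvGet2 (-1) g x y = -1 ∧
              ∃ mv' ∈ mv :: mvs, x = s + mv'.1 ∧ y = t + mv'.2 := by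
            obtain ⟨mv', h1, h2⟩ := hc2.2
            exact ⟨hc2.1, mv', List.mem_cons_of_mem _ h1, h2⟩
          rw [if_pos hc2, if_pos hcondc]
        · have hcondc : ¬(pvGet2 (-1) g x y = -1 ∧
              ∃ mv' ∈ mv :: mvs, x = s + mv'.1 ∧ y = t + mv'.2) := by
            rintro ⟨h1, mv', hmv', e1, e2⟩
            rcases List.mem_cons.mp hmv' with h | h
            · subst h; exact hxy ⟨e1, e2⟩
            · exact hc2 ⟨h1, mv', h, e1, e2⟩
          rw [if_neg hc2, if_neg hcondc]
    · rw [if_neg hC]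
      obtain ⟨hWF', hpt⟩ := ih g hWF
      refine ⟨hWF', ?_⟩
      intro x y hx0 hxn hy0 hym
      rw [hpt x y hx0 hxn hy0 hym]
      congr 1
      rw [eq_iff_iff]
      constructor
      · rintro ⟨h1, mv', hmv', e1, e2⟩
        exact ⟨h1, mv', List.mem_cons_of_mem _ hmv', e1, e2⟩
      · rintro ⟨h1, mv', hmv', e1, e2⟩
        rcases List.mem_cons.mp hmv' with h | h
        · exfalso
          subst h
          exact hC ⟨by omega, by omega, by omega, by omega, by rw [← e1, ← e2]; exact h1⟩
        · exact ⟨h1, mv', h, e1, e2⟩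

-- ---------- the outer loops agree ----------

theorem pvOuter (n m : Int) (N : Nat) :
    ∀ (field : List (List (Option Int))) (prev : List (List (Int × Int)))
      (L : List (Int × Int)),
      pvUnvisA field ≤ N →
      pvWF n m field →
      L ≠ [] →
      (∀ c ∈ L, 0 ≤ c.1 ∧ c.1 < n ∧ 0 ≤ c.2 ∧ c.2 < m) →
      (∀ c ∈ L, pvGet2 (-1) (pvMapF field) c.1 c.2 = ((prev.length : Nat) : Int)) →
      (∀ x y : Int, 0 ≤ x → x < n → 0 ≤ y → y < m →
        pvGet2 (-1) (pvMapF field) x y = ((prev.length : Nat) : Int) → (x, y) ∈ L) →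
      (∀ x y : Int, 0 ≤ x → x < n → 0 ≤ y → y < m →
        pvGet2 (-1) (pvMapF field) x y ≤ ((prev.length : Nat) : Int)) →
      pvMapF (pvBfsA n m field (prev ++ [L]) ((prev.length : Nat) : Int))
          = pvLoopB n m (pvMapF field) ((prev.length : Nat) : Int) ∧
      (∀ x y : Int, pvGet2 none field x y ≠ none →
        pvGet2 none (pvBfsA n m field (prev ++ [L]) ((prev.length : Nat) : Int)) x y ≠ none) := by
  induction N using Nat.strong_induction_on with
  | _ N ihN =>
  intro field prev L hN hWF hLne hcan hval hcomp hle
  have hd : (0 : Int) ≤ ((prev.length : Nat) : Int) := by omega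
  obtain ⟨field', news, eA, hWF', hpt, hmem, hcnt, hmono⟩ :=
    pvLevel n m ((prev.length : Nat) : Int) hd L field (prev ++ [L]) []
      ((prev.length : Nat) : Int) hWF (by simp) hcan hval
  simp only [List.nil_append] at eA
  rw [if_neg hLne] at eA
  rw [show pvRep ([] : List (Int × Int)) = [] from rfl, List.append_nil] at eA
  have hbr := pvBridge n m ((prev.length : Nat) : Int) (pvMapF field) hd L hcan hval hcomp
  -- the sweep on the mapped board
  obtain ⟨sWF, spt, sch, sle, slt⟩ :=
    pvSweepChar n m ((prev.length : Nat) : Int) hd (pvMapF field) (pvMapF_WF hWF)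
  -- the two result boards are pointwise equal, hence equal
  have heq : pvMapF field' = (pvSweep n m ((prev.length : Nat) : Int) (pvMapF field)).1 := by
    apply pvGridExt (pvMapF_WF hWF') sWF
    intro x y hx0 hxn hy0 hym
    rw [hpt x y hx0 hxn hy0 hym, spt x y hx0 hxn hy0 hym]
    by_cases hc : pvP n m ((prev.length : Nat) : Int) (pvMapF field) x y
    · rw [if_pos hc, if_pos ((hbr x y hx0 hxn hy0 hym).mpr hc)]
    · rw [if_neg hc, if_neg (fun h => hc ((hbr x y hx0 hxn hy0 hym).mp h))]
  -- the change flag fires exactly when A found new cells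
  have hchange : (pvSweep n m ((prev.length : Nat) : Int) (pvMapF field)).2 = true ↔ news ≠ [] := by
    rw [sch]
    constructor
    · rintro ⟨x, y, a1, a2, a3, a4, a5⟩
      have hw : (x, y) ∈ news := by
        rw [hmem (x, y)]
        obtain ⟨p1, p2⟩ := (hbr x y a1 a2 a3 a4).mpr a5
        exact ⟨a1, a2, a3, a4, p1, p2⟩
      exact fun hnil => by rw [hnil] at hw; simp at hw
    · intro hne
      obtain ⟨w, hw⟩ := List.exists_mem_of_ne_nil news hne
      obtain ⟨a1, a2, a3, a4, a5, a6⟩ := (hmem w).mp hw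
      exact ⟨w.1, w.2, a1, a2, a3, a4, (hbr w.1 w.2 a1 a2 a3 a4).mp ⟨a5, a6⟩⟩
  -- unfold one step of A's loop
  have hplen : (((prev ++ [L]).length : Nat) : Int) = ((prev.length : Nat) : Int) + 1 := by
    simp only [List.length_append, List.length_cons, List.length_nil]; push_cast; omega
  have hlt : ((prev.length : Nat) : Int) < (((prev ++ [L]).length : Nat) : Int) := by omega
  have hgetL : PySem.List.pyGet? (prev ++ [L]) ((prev.length : Nat) : Int) = some L :=
    PySem.List.pyGet?_append_length prev [] L
  -- unfold one step of B's loop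
  by_cases hnews : news = []
  · subst hnews
    have hch : (pvSweep n m ((prev.length : Nat) : Int) (pvMapF field)).2 = false := by
      rcases Bool.eq_false_or_eq_true (pvSweep n m ((prev.length : Nat) : Int) (pvMapF field)).2
        with h | h
      · exact absurd rfl (hchange.mp h)
      · exact h
    have hcntEq : pvUnvisA field' = pvUnvisA field := by simpa using hcnt
    rw [show pvRep ([] : List (Int × Int)) = [] from rfl, List.append_nil] at eA
    have hbfsa : pvBfsA n m field (prev ++ [L]) ((prev.length : Nat) : Int) = field' := by
      conv_lhs => rw [pvBfsA]
      rw [if_pos hlt]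
      simp only [hgetL, Option.getD_some, eA]
      rw [dif_neg (by omega)]
    have hloopb : pvLoopB n m (pvMapF field) ((prev.length : Nat) : Int)
        = (pvSweep n m ((prev.length : Nat) : Int) (pvMapF field)).1 := by
      rw [pvLoopB]
      simp only [hch]
      simp
    refine ⟨?_, ?_⟩
    · rw [hbfsa, hloopb, heq]
    · intro x y h
      rw [hbfsa]
      exact hmono x y h
  · have hch : (pvSweep n m ((prev.length : Nat) : Int) (pvMapF field)).2 = true :=
      hchange.mpr hnews
    have hlen0 : news.length ≠ 0 := fun h => hnews (List.eq_nil_of_length_eq_zero h)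
    have hdec : pvUnvisA field' < pvUnvisA field := by omega
    have hrep : pvRep news = [news] := by
      simp [pvRep, hnews]
    rw [hrep] at eA
    have hbfsa : pvBfsA n m field (prev ++ [L]) ((prev.length : Nat) : Int)
        = pvBfsA n m field' ((prev ++ [L]) ++ [news]) (((prev.length : Nat) : Int) + 1) := by
      conv_lhs => rw [pvBfsA]
      rw [if_pos hlt]
      simp only [hgetL, Option.getD_some, eA]
      rw [dif_pos hdec]
    have hloopb : pvLoopB n m (pvMapF field) ((prev.length : Nat) : Int)
        = pvLoopB n m (pvSweep n m ((prev.length : Nat) : Int) (pvMapF field)).1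
            (((prev.length : Nat) : Int) + 1) := by
      rw [pvLoopB]
      simp only [hch]
      have hguard : pvUnvis (pvSweep n m ((prev.length : Nat) : Int) (pvMapF field)).1
          < pvUnvis (pvMapF field) := slt hch
      simp [hguard]
    -- establish the invariants at the next level
    have hval' : ∀ c ∈ news, pvGet2 (-1) (pvMapF field') c.1 c.2
        = (((prev ++ [L]).length : Nat) : Int) := by
      intro c hc
      obtain ⟨a1, a2, a3, a4, a5, a6⟩ := (hmem c).mp hc
      rw [hplen, hpt c.1 c.2 a1 a2 a3 a4, if_pos ⟨a5, a6⟩]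
    have hcomp' : ∀ x y : Int, 0 ≤ x → x < n → 0 ≤ y → y < m →
        pvGet2 (-1) (pvMapF field') x y = (((prev ++ [L]).length : Nat) : Int) → (x, y) ∈ news := by
      intro x y hx0 hxn hy0 hym hv
      rw [hplen] at hv
      rw [hpt x y hx0 hxn hy0 hym] at hv
      by_cases hc : pvGet2 (-1) (pvMapF field) x y = -1 ∧
          ∃ l ∈ L, ∃ mv ∈ pvMoves, x = l.1 + mv.1 ∧ y = l.2 + mv.2
      · rw [hmem (x, y)]
        exact ⟨hx0, hxn, hy0, hym, hc.1, hc.2⟩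
      · rw [if_neg hc] at hv
        have := hle x y hx0 hxn hy0 hym
        omega
    have hle' : ∀ x y : Int, 0 ≤ x → x < n → 0 ≤ y → y < m →
        pvGet2 (-1) (pvMapF field') x y ≤ (((prev ++ [L]).length : Nat) : Int) := by
      intro x y hx0 hxn hy0 hym
      rw [hplen, hpt x y hx0 hxn hy0 hym]
      by_cases hc : pvGet2 (-1) (pvMapF field) x y = -1 ∧
          ∃ l ∈ L, ∃ mv ∈ pvMoves, x = l.1 + mv.1 ∧ y = l.2 + mv.2
      · rw [if_pos hc]
      · rw [if_neg hc]
        have := hle x y hx0 hxn hy0 hym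
        omega
    have hcan' : ∀ c ∈ news, 0 ≤ c.1 ∧ c.1 < n ∧ 0 ≤ c.2 ∧ c.2 < m := by
      intro c hc
      obtain ⟨a1, a2, a3, a4, _⟩ := (hmem c).mp hc
      exact ⟨a1, a2, a3, a4⟩
    obtain ⟨ih1, ih2⟩ := ihN (pvUnvisA field') (by omega) field' (prev ++ [L]) news
      (le_refl _) hWF' hnews hcan' hval' hcomp' hle'
    refine ⟨?_, ?_⟩
    · rw [hbfsa, hloopb, ← hplen, ih1, hplen, heq]
    · intro x y h
      rw [hbfsa, ← hplen]
      exact ih2 x y (hmono x y h)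

-- ---------- the initial board ----------

theorem pvWF_replicate {α : Type} (n m : Int) (a : α) :
    pvWF n m (List.replicate n.toNat (List.replicate m.toNat a)) := by
  refine ⟨by simp, ?_⟩
  intro row hrow
  rw [List.eq_of_mem_replicate hrow]
  simp

theorem pvWF_fleaFold (n m : Int) (fleas : List (List Int)) (f : List (List (Option Int)))
    (hWF : pvWF n m f) :
    pvWF n m (fleas.foldl (fun f fl =>
      pvSet2 f (PySem.List.pyGetD fl 0 0) (PySem.List.pyGetD fl 1 0) (some (-1))) f) := by
  induction fleas generalizing f with
  | nil => exact hWF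
  | cons fl rest ih => exact ih _ (pvWF_set2 hWF _ _ _)

theorem pvWF_getField (n m s t : Int) (fleas : List (List Int)) :
    pvWF n m (pvGetField n m s t fleas) :=
  pvWF_set2 (pvWF_fleaFold n m fleas _ (pvWF_replicate n m none)) _ _ _

theorem pvSet2_dist0 (a b : Nat) (x y : Int) :
    pvSet2 (List.replicate a (List.replicate b (-1 : Int))) x y (-1)
      = List.replicate a (List.replicate b (-1 : Int)) := by
  rcases pvSet2_eq_cases (List.replicate a (List.replicate b (-1 : Int))) x y (-1) with
    h | ⟨row, k, hg, hk, h⟩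
  · exact h
  · rw [h]
    have hrow : row = List.replicate b (-1 : Int) :=
      List.eq_of_mem_replicate (PySem.List.mem_of_pyGet?_eq_some _ hg)
    subst hrow
    have hset : PySem.List.pySetD (List.replicate b (-1 : Int)) y (-1)
        = List.replicate b (-1 : Int) := by
      unfold PySem.List.pySetD PySem.List.pySet?
      cases hj : PySem.List.pyIdx? (List.replicate b (-1 : Int)).length y with
      | none => simp
      | some j => simp [List.set_replicate_self]
    rw [hset]
    exact List.set_replicate_self

theorem pvMapF_getField (n m s t : Int) (fleas : List (List Int)) :
    pvMapF (pvGetField n m s t fleas)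
      = pvSet2 (List.replicate n.toNat (List.replicate m.toNat (-1 : Int))) s t 0 := by
  unfold pvGetField
  rw [pvMapF_set2]
  congr 1
  have h0 : pvMapF (List.replicate n.toNat (List.replicate m.toNat (none : Option Int)))
      = List.replicate n.toNat (List.replicate m.toNat (-1 : Int)) := by
    unfold pvMapF
    simp [List.map_replicate]
  have : ∀ (l : List (List Int)) (f : List (List (Option Int))),
      pvMapF f = List.replicate n.toNat (List.replicate m.toNat (-1 : Int)) →
      pvMapF (l.foldl (fun f fl =>
        pvSet2 f (PySem.List.pyGetD fl 0 0) (PySem.List.pyGetD fl 1 0) (some (-1))) f)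
        = List.replicate n.toNat (List.replicate m.toNat (-1 : Int)) := by
    intro l
    induction l with
    | nil => intro f hf; exact hf
    | cons fl rest ih =>
      intro f hf
      apply ih
      rw [pvMapF_set2, hf, pvSet2_dist0]
  exact this fleas _ h0

theorem pvSomeFold_mono (fleas : List (List Int)) :
    ∀ (f : List (List (Option Int))) (x y : Int), pvGet2 none f x y ≠ none →
      pvGet2 none (fleas.foldl (fun f fl =>
        pvSet2 f (PySem.List.pyGetD fl 0 0) (PySem.List.pyGetD fl 1 0) (some (-1))) f) x y ≠ none := by
  induction fleas with
  | nil => intro f x y h; exact h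
  | cons fl rest ih =>
    intro f x y h
    apply ih
    rcases pvGet2_set2_cases (none : Option Int) f (PySem.List.pyGetD fl 0 0)
        (PySem.List.pyGetD fl 1 0) x y (some (-1)) with h2 | ⟨h2, _⟩
    · rw [h2]; exact h
    · rw [h2]; simp

theorem pvGetField_flea_some (n m s t : Int) (fleas : List (List Int))
    (hfl : ∀ fl ∈ fleas, PySem.Raise.InRange n.toNat (PySem.List.pyGetD fl 0 0) ∧
      PySem.Raise.InRange m.toNat (PySem.List.pyGetD fl 1 0)) :
    ∀ fl ∈ fleas, pvGet2 none (pvGetField n m s t fleas)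
      (PySem.List.pyGetD fl 0 0) (PySem.List.pyGetD fl 1 0) ≠ none := by
  unfold pvGetField
  intro fl hfl'
  have hmain : ∀ (l : List (List Int)) (f : List (List (Option Int))), pvWF n m f →
      (∀ g ∈ l, PySem.Raise.InRange n.toNat (PySem.List.pyGetD g 0 0) ∧
        PySem.Raise.InRange m.toNat (PySem.List.pyGetD g 1 0)) →
      ∀ g ∈ l, pvGet2 none (l.foldl (fun f fl =>
        pvSet2 f (PySem.List.pyGetD fl 0 0) (PySem.List.pyGetD fl 1 0) (some (-1))) f)
        (PySem.List.pyGetD g 0 0) (PySem.List.pyGetD g 1 0) ≠ none := by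
    intro l
    induction l with
    | nil => intro f _ _ g hg; simp at hg
    | cons fl0 rest ih =>
      intro f hWF hran g hg
      rcases List.mem_cons.mp hg with hg | hg
      · subst hg
        rw [List.foldl_cons]
        apply pvSomeFold_mono
        rw [pvGet2_set2_self none (some (-1)) hWF (hran g (by simp)).1 (hran g (by simp)).2]
        simp
      · rw [List.foldl_cons]
        exact ih _ (pvWF_set2 hWF _ _ _) (fun g' hg' => hran g' (by simp [hg'])) g hg
  have h1 := hmain fleas _ (pvWF_replicate n m none) hfl fl hfl'
  rcases pvGet2_set2_cases (none : Option Int) _ s t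
      (PySem.List.pyGetD fl 0 0) (PySem.List.pyGetD fl 1 0) (some 0) with h2 | ⟨h2, _⟩
  · rw [h2]; exact h1
  · rw [h2]; simp

-- ---------- the final summing loops agree ----------

theorem pvSum_eq (field : List (List (Option Int))) (fleas : List (List Int))
    (hsome : ∀ fl ∈ fleas, pvGet2 none field
      (PySem.List.pyGetD fl 0 0) (PySem.List.pyGetD fl 1 0) ≠ none) :
    ∀ a, pvSumFleasA field fleas a = pvSumFleasB (pvMapF field) fleas a := by
  induction fleas with
  | nil => intro a; rfl
  | cons fl rest ih =>
    intro a
    obtain ⟨w, hw⟩ := Option.ne_none_iff_exists'.mp (hsome fl (by simp))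
    rw [pvSumFleasA, pvSumFleasB]
    rw [pvMapF_get2, hw]
    simp only [Option.getD_some]
    by_cases hwv : w = -1
    · subst hwv
      rw [if_pos rfl, if_pos rfl]
    · rw [if_neg (by simp [hwv]), if_neg hwv]
      exact ih (fun g hg => hsome g (by simp [hg])) (a + w)

-- ===== VERDICT (by name: the statement is the Claim_ definition above) =====
theorem fleas_distance_spec : Claim_equal_fleas_distance := by
  intro n m s t q fleas hDom hPre
  obtain ⟨hsr, htr, hfl⟩ := hPre
  unfold Spec_fleas_distance
  simp only [fleas_distance, fleas_distance_alt]
  have hWF0 : pvWF n m (pvGetField n m s t fleas) := pvWF_getField n m s t fleas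
  have hWFr : pvWF n m (List.replicate n.toNat (List.replicate m.toNat (-1 : Int))) :=
    pvWF_replicate n m (-1)
  have hWFg0 : pvWF n m (pvSet2 (List.replicate n.toNat (List.replicate m.toNat (-1 : Int))) s t 0) :=
    pvWF_set2 hWFr s t 0
  have hmap0 := pvMapF_getField n m s t fleas
  have hst : pvGet2 none (pvGetField n m s t fleas) s t = some 0 := by
    unfold pvGetField
    exact pvGet2_set2_self none (some 0)
      (pvWF_fleaFold n m fleas _ (pvWF_replicate n m none)) hsr htr
  have hsome0 := pvGetField_flea_some n m s t fleas
    (fun fl h => ⟨(hfl fl h).2.1, (hfl fl h).2.2⟩)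
  -- the mapped initial board takes only the values 0 and -1
  have hg0cases : ∀ x y : Int,
      pvGet2 (-1) (pvSet2 (List.replicate n.toNat (List.replicate m.toNat (-1 : Int))) s t 0) x y = 0 ∨
      pvGet2 (-1) (pvSet2 (List.replicate n.toNat (List.replicate m.toNat (-1 : Int))) s t 0) x y = -1 := by
    intro x y
    rcases pvGet2_set2_cases (-1) (List.replicate n.toNat (List.replicate m.toNat (-1 : Int)))
        s t x y 0 with h | ⟨h, _⟩
    · right; rw [h]; exact pvGet2_rep _ _ _ _
    · left; exact h
  -- A's first loop iteration: the start cell is expanded (pvPercell at d = 0)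
  obtain ⟨field₁, news, eA, hWF₁, hpt₁, hmem₁, hcnt₁, hmono₁⟩ :=
    pvPercell n m 0 (le_refl 0) (s, t) pvMoves (pvGetField n m s t fleas) [[(s, t)]] []
      hWF0 (by simp)
  rw [show pvRep ([] : List (Int × Int)) = [] from rfl, List.append_nil] at eA
  simp only [List.nil_append] at eA hmem₁
  rw [hmap0] at hpt₁ hmem₁
  -- B's seeding pass gives the same board
  obtain ⟨hWFs, hspt⟩ := pvSeedChar n m s t pvMoves
    (pvSet2 (List.replicate n.toNat (List.replicate m.toNat (-1 : Int))) s t 0) hWFg0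
  have hseed : pvSeed n m s t (pvSet2 (List.replicate n.toNat (List.replicate m.toNat (-1 : Int))) s t 0)
      = pvMapF field₁ := by
    apply pvGridExt hWFs (pvMapF_WF hWF₁)
    intro x y hx0 hxn hy0 hym
    rw [hspt x y hx0 hxn hy0 hym, hpt₁ x y hx0 hxn hy0 hym]
    norm_num
  -- one unfolding of A's outer loop
  have hfold : [(s, t)].foldl (pvCellStepA n m) (pvGetField n m s t fleas, [[(s, t)]], 0)
      = (field₁, [[(s, t)]] ++ pvRep news, 0 + 1) := by
    rw [List.foldl_cons, List.foldl_nil, pvCellStepA_eq', hst]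
    simpa using eA
  have hA1 : pvBfsA n m (pvGetField n m s t fleas) [[(s, t)]] 0
      = (if pvUnvisA field₁ < pvUnvisA (pvGetField n m s t fleas) then
          pvBfsA n m field₁ ([[(s, t)]] ++ pvRep news) (0 + 1) else field₁) := by
    conv_lhs => rw [pvBfsA]
    rw [if_pos (by norm_num)]
    have hg : PySem.List.pyGet? [[(s, t)]] (0 : Int) = some [(s, t)] :=
      PySem.List.pyGet?_zero_cons _ _
    simp only [hg, Option.getD_some, hfold]
    split_ifs with h
    · rfl
    · rfl
  -- the values of the flea cells agree in the end (both boards are the same)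
  by_cases hnews : news = []
  · subst hnews
    have hA2 : pvBfsA n m (pvGetField n m s t fleas) [[(s, t)]] 0 = field₁ := by
      rw [hA1, if_neg (by simp at hcnt₁; omega)]
    -- no cell carries the value 1, so B's first sweep changes nothing
    have hno1 : ∀ x y : Int, 0 ≤ x → x < n → 0 ≤ y → y < m →
        pvGet2 (-1) (pvMapF field₁) x y ≠ 1 := by
      intro x y hx0 hxn hy0 hym
      rw [hpt₁ x y hx0 hxn hy0 hym]
      by_cases hc : pvGet2 (-1) (pvSet2 (List.replicate n.toNat (List.replicate m.toNat (-1 : Int))) s t 0) x y = -1 ∧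
          ∃ mv ∈ pvMoves, x = (s, t).1 + mv.1 ∧ y = (s, t).2 + mv.2
      · exfalso
        have : (x, y) ∈ ([] : List (Int × Int)) := (hmem₁ (x, y)).mpr ⟨hx0, hxn, hy0, hym, hc.1, hc.2⟩
        simp at this
      · rw [if_neg hc]
        rcases hg0cases x y with h | h <;> rw [h] <;> omega
    obtain ⟨sWF, spt, sch, sle, slt⟩ := pvSweepChar n m 1 (by omega) (pvMapF field₁) (pvMapF_WF hWF₁)
    have hchf : (pvSweep n m 1 (pvMapF field₁)).2 = false := by
      rcases Bool.eq_false_or_eq_true (pvSweep n m 1 (pvMapF field₁)).2 with h | h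
      · exfalso
        obtain ⟨x, y, a1, a2, a3, a4, a5⟩ := sch.mp h
        obtain ⟨_, mv, _, b1, b2, b3, b4, b5⟩ := a5
        exact hno1 (x + mv.1) (y + mv.2) b1 b2 b3 b4 b5
      · exact h
    have hB2 : pvLoopB n m (pvMapF field₁) 1 = pvMapF field₁ := by
      rw [pvLoopB]
      simp only [hchf]
      simp only [Bool.false_eq_true, if_false]
      apply pvGridExt sWF (pvMapF_WF hWF₁)
      intro x y hx0 hxn hy0 hym
      rw [spt x y hx0 hxn hy0 hym]
      rw [if_neg ?_]
      rintro ⟨h1, mv, hmv, b1, b2, b3, b4, b5⟩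
      exact hno1 (x + mv.1) (y + mv.2) b1 b2 b3 b4 b5
    rw [hA2, hseed, hB2]
    exact pvSum_eq _ fleas (fun fl h => hmono₁ _ _ (hsome0 fl h)) 0
  · have hlen0 : news.length ≠ 0 := fun h => hnews (List.eq_nil_of_length_eq_zero h)
    have hA2 : pvBfsA n m (pvGetField n m s t fleas) [[(s, t)]] 0
        = pvBfsA n m field₁ [[(s, t)], news] 1 := by
      rw [hA1, if_pos (by omega)]
      have : [[(s, t)]] ++ pvRep news = [[(s, t)], news] := by
        simp [pvRep, hnews]
      rw [this]
      norm_num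
    -- the invariants at distance level 1
    have hcan' : ∀ c ∈ news, 0 ≤ c.1 ∧ c.1 < n ∧ 0 ≤ c.2 ∧ c.2 < m := by
      intro c hc
      obtain ⟨a1, a2, a3, a4, _⟩ := (hmem₁ c).mp hc
      exact ⟨a1, a2, a3, a4⟩
    have hval' : ∀ c ∈ news, pvGet2 (-1) (pvMapF field₁) c.1 c.2 = (((1 : Nat) : Nat) : Int) := by
      intro c hc
      obtain ⟨a1, a2, a3, a4, a5, a6⟩ := (hmem₁ c).mp hc
      rw [hpt₁ c.1 c.2 a1 a2 a3 a4, if_pos ⟨a5, a6⟩]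
      norm_num
    have hcomp' : ∀ x y : Int, 0 ≤ x → x < n → 0 ≤ y → y < m →
        pvGet2 (-1) (pvMapF field₁) x y = (((1 : Nat) : Nat) : Int) → (x, y) ∈ news := by
      intro x y hx0 hxn hy0 hym hv
      rw [hpt₁ x y hx0 hxn hy0 hym] at hv
      by_cases hc : pvGet2 (-1) (pvSet2 (List.replicate n.toNat (List.replicate m.toNat (-1 : Int))) s t 0) x y = -1 ∧
          ∃ mv ∈ pvMoves, x = (s, t).1 + mv.1 ∧ y = (s, t).2 + mv.2
      · exact (hmem₁ (x, y)).mpr ⟨hx0, hxn, hy0, hym, hc.1, hc.2⟩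
      · exfalso
        rw [if_neg hc] at hv
        rcases hg0cases x y with h | h <;> rw [h] at hv <;> simp at hv
    have hle' : ∀ x y : Int, 0 ≤ x → x < n → 0 ≤ y → y < m →
        pvGet2 (-1) (pvMapF field₁) x y ≤ (((1 : Nat) : Nat) : Int) := by
      intro x y hx0 hxn hy0 hym
      rw [hpt₁ x y hx0 hxn hy0 hym]
      by_cases hc : pvGet2 (-1) (pvSet2 (List.replicate n.toNat (List.replicate m.toNat (-1 : Int))) s t 0) x y = -1 ∧
          ∃ mv ∈ pvMoves, x = (s, t).1 + mv.1 ∧ y = (s, t).2 + mv.2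
      · rw [if_pos hc]; norm_num
      · rw [if_neg hc]
        rcases hg0cases x y with h | h <;> rw [h] <;> norm_num
    obtain ⟨heq, hsomeF⟩ := pvOuter n m (pvUnvisA field₁) field₁ [[(s, t)]] news
      (le_refl _) hWF₁ hnews hcan' hval' hcomp' hle'
    have hpl : (([[(s, t)]].length : Nat) : Int) = 1 := by norm_num
    simp only [hpl, List.singleton_append] at heq hsomeF
    rw [hA2, pvSum_eq _ fleas
      (fun fl h => hsomeF _ _ (hmono₁ _ _ (hsome0 fl h))) 0, heq, hseed]
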